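-- pv_equiv track=rewrite | github.com/Juahjoah/Algorithm | 프로그래머스/2/388353. 지게차와 크레인/지게차와 크레인.py | solution
-- ===== SOURCE A (Python) =====
-- from collections import deque
--
-- def bfs(target, storage, n, m):
--     dx = [0, 1, 0, -1]
--     dy = [1, 0, -1, 0]
--
--     visited = list([0] * (m + 2) for _ in range(n + 2))
--     new_storage = list([0] * (m + 2) for _ in range(n + 2))
--     for i in range(n):
--         for j in range(m):
--             new_storage[i+1][j+1] = storage[i][j]
--
--     queue = deque()
--     queue.append((0, 0))
--     visited[0][0] = 1
--
--     while queue: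
--         x, y = queue.popleft()
--         for d in range(4):
--             nx = x + dx[d]
--             ny = y + dy[d]
--
--             if not (0 <= nx < n + 2 and 0 <= ny < m + 2):
--                 continue
--             if visited[nx][ny] == 1:
--                 continue
--
--             visited[nx][ny] = 1
--
--             if new_storage[nx][ny] == target:
--                 new_storage[nx][ny] = 0
--             elif new_storage[nx][ny] == 0:
--                 queue.append((nx, ny))
--
--     for i in range(n):
--         for j in range(m):
--             storage[i][j] = new_storage[i+1][j+1]
--
-- def solution(storage, requests):
--     answer = 0
--     storage = [list(s) for s in storage]
--     n = len(storage) # rows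
--     m = len(storage[0]) # cols
--
--     for request in requests:
--         if len(request) == 1:
--             # 지게차로 꺼내는 경우
--             bfs(request[0], storage, n, m)
--         else:
--             # 크레인으로 꺼내는 경우
--             for rows in range(n):
--                 for cols in range(m):
--                     if storage[rows][cols] == request[0]:
--                         storage[rows][cols] = 0
--
--     for r in range(n):
--         for c in range(m):
--             if storage[r][c]!= 0:
--                 answer += 1
--
--     return answer
-- ===== SOURCE B (Python) =====
-- def solution(storage, requests):
--     m = len(storage[0])
--     grid = [list(row[:m]) for row in storage]
--     n = len(grid)
--     for req in requests:
--         if len(req) == 1: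
--             t = req[0]
--             # forklift: flood fill exterior-connected empties on the padded frame,
--             # then zero targets adjacent to a reachable empty (or the border)
--             def empty(i, j):
--                 return i == 0 or i == n + 1 or j == 0 or j == m + 1 or grid[i-1][j-1] == 0
--             reach = set()
--             stack = [(0, 0)]
--             while stack:
--                 p = stack.pop()
--                 if p in reach:
--                     continue
--                 reach.add(p)
--                 i, j = p
--                 for q in ((i + 1, j), (i - 1, j), (i, j + 1), (i, j - 1)):
--                     if 0 <= q[0] <= n + 1 and 0 <= q[1] <= m + 1 and empty(*q) and q not in reach:
--                         stack.append(q)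
--             for i in range(n):
--                 for j in range(m):
--                     if grid[i][j] == t and any(q in reach for q in ((i + 2, j + 1), (i, j + 1), (i + 1, j + 2), (i + 1, j))):
--                         grid[i][j] = 0
--         else:
--             # crane: zero every matching cell
--             for i in range(n):
--                 for j in range(m):
--                     if grid[i][j] == req[0]:
--                         grid[i][j] = 0
--     return sum(1 for row in grid for x in row if x != 0)
-- ===== Notes on version B (the rewrite author's own statement) =====
-- stated objective: alternative
-- what changed: A's forklift step zeroes target cells while BFS-flooding a padded copy of the grid with a visited matrix and a FIFO queue; B instead runs one DFS-stack flood fill over a virtual padded frame collecting the set of exterior-connected empty cells, then makes a separate pass zeroing target cells adjacent to that set, working in place on the uncopied grid; crane requests and the final nonzero count keep A's shape.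
import Mathlib
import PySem

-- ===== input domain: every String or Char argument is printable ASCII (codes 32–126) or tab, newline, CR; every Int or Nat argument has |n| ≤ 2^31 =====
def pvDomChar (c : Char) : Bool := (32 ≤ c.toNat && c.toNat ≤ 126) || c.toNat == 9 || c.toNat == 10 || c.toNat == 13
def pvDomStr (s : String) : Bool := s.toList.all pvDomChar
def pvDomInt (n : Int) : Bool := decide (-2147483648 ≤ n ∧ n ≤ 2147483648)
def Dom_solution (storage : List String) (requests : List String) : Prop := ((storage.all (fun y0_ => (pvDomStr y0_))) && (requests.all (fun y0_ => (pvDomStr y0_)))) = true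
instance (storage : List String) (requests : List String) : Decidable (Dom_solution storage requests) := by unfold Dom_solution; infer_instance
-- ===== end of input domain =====

-- B replaces A's zero-during-BFS forklift step by one exterior flood fill over empties
-- (DFS stack, padded frame) followed by a separate zeroing pass over target cells
-- adjacent to a reachable empty; crane and final count as in A (objective: alternative).
-- A does not mutate its arguments (it copies storage); equivalence is about the return value.

-- ===== PORT A =====
-- cells: 'some c' = a character, 'none' = Python's int 0 (the removed/empty marker)
def pvGet2 {α : Type} (g : List (List α)) (i j : Nat) (d : α) : α := (g.getD i []).getD j d

def pvSet2 {α : Type} (g : List (List α)) (i j : Nat) (v : α) : List (List α) :=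
  g.set i ((g.getD i []).set j v)

def pvDx : List Int := [0, 1, 0, -1]
def pvDy : List Int := [1, 0, -1, 0]

-- number of still-unvisited entries; used only as the fuel bound for the while loop
def pvFalseCount (v : List (List Bool)) : Nat := (v.map (fun r => r.countP (fun b => !b))).sum

-- body of 'for d in range(4)' inside the while loop; state = (queue, visited, new_storage)
def bfsStep (n m : Nat) (target : Char) (x y : Int)
    (s : List (Int × Int) × List (List Bool) × List (List (Option Char))) (d : Nat) :
    List (Int × Int) × List (List Bool) × List (List (Option Char)) :=
  let nx := x + pvDx.getD d 0
  let ny := y + pvDy.getD d 0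
  if ¬ (0 ≤ nx ∧ nx < (n : Int) + 2 ∧ 0 ≤ ny ∧ ny < (m : Int) + 2) then s
  else if pvGet2 s.2.1 nx.toNat ny.toNat false = true then s
  else
    let visited := pvSet2 s.2.1 nx.toNat ny.toNat true
    if pvGet2 s.2.2 nx.toNat ny.toNat none = some target then
      (s.1, visited, pvSet2 s.2.2 nx.toNat ny.toNat none)
    else if pvGet2 s.2.2 nx.toNat ny.toNat none = none then
      (s.1 ++ [(nx, ny)], visited, s.2.2)
    else (s.1, visited, s.2.2)

-- 'while queue:'; fuel only makes the recursion structural, it is provably sufficient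
def bfsLoop (n m : Nat) (target : Char) :
    Nat → List (Int × Int) → List (List Bool) → List (List (Option Char)) →
    List (List Bool) × List (List (Option Char))
  | 0, _, visited, g => (visited, g)
  | _ + 1, [], visited, g => (visited, g)
  | fuel + 1, (x, y) :: rest, visited, g =>
    let s := (List.range 4).foldl (bfsStep n m target x y) (rest, visited, g)
    bfsLoop n m target fuel s.1 s.2.1 s.2.2

def bfs (target : Char) (storage : List (List (Option Char))) (n m : Nat) :
    List (List (Option Char)) :=
  let visited0 : List (List Bool) := List.replicate (n + 2) (List.replicate (m + 2) false)
  let ns0 : List (List (Option Char)) := List.replicate (n + 2) (List.replicate (m + 2) none)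
  let ns := (List.range n).foldl (fun acc i =>
    (List.range m).foldl (fun acc j =>
      pvSet2 acc (i + 1) (j + 1) (pvGet2 storage i j none)) acc) ns0
  let visited := pvSet2 visited0 0 0 true
  let r := bfsLoop n m target (pvFalseCount visited + 2) [((0 : Int), (0 : Int))] visited ns
  (List.range n).foldl (fun acc i =>
    (List.range m).foldl (fun acc j =>
      pvSet2 acc i j (pvGet2 r.2 (i + 1) (j + 1) none)) acc) storage

def solution (storage : List String) (requests : List String) : Int :=
  let st : List (List (Option Char)) := storage.map (fun s => s.toList.map some)
  let n := st.length
  let m := (st.getD 0 []).length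
  let stf := requests.foldl (fun st req =>
    let cs := req.toList
    if cs.length = 1 then
      bfs (cs.headD ' ') st n m
    else
      (List.range n).foldl (fun st r =>
        (List.range m).foldl (fun st c =>
          if pvGet2 st r c none = some (cs.headD ' ') then pvSet2 st r c none else st) st) st) st
  (List.range n).foldl (fun a r =>
    (List.range m).foldl (fun a c =>
      if pvGet2 stf r c none ≠ none then a + 1 else a) a) (0 : Int)

-- ===== PORT B =====
-- padded coordinates: (0,0)…(n+1,m+1); interior cell (i,j) of the grid is (i+1,j+1)
def pvNbrs (p : Int × Int) : List (Int × Int) :=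
  [(p.1 + 1, p.2), (p.1 - 1, p.2), (p.1, p.2 + 1), (p.1, p.2 - 1)]

-- B's 'empty(i, j)': border of the padded frame, or an empty (0) grid cell
def pvEmptyAt (grid : List (List (Option Char))) (n m : Nat) (p : Int × Int) : Bool :=
  p.1 == 0 || p.1 == (n : Int) + 1 || p.2 == 0 || p.2 == (m : Int) + 1 ||
    (pvGet2 grid (p.1 - 1).toNat (p.2 - 1).toNat (some ' ') == none)

-- B's while loop over the explicit stack (held top-first: Python's .pop() = head,
-- .append of the four candidates in order = consing them in order); fuel is a
-- totality guard only, provably sufficient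
def pvFloodLoop (grid : List (List (Option Char))) (n m : Nat) :
    Nat → List (Int × Int) → PySem.Set (Int × Int) → PySem.Set (Int × Int)
  | 0, _, reach => reach
  | _ + 1, [], reach => reach
  | fuel + 1, p :: stack, reach =>
    if reach.contains p then pvFloodLoop grid n m fuel stack reach
    else
      let reach' := reach.add p
      let stack' := (pvNbrs p).foldl (fun st q =>
        if (decide (0 ≤ q.1) && decide (q.1 ≤ (n : Int) + 1) &&
            decide (0 ≤ q.2) && decide (q.2 ≤ (m : Int) + 1)) &&
           pvEmptyAt grid n m q && !(reach'.contains q) then q :: st else st) stack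
      pvFloodLoop grid n m fuel stack' reach'

def solution_alt (storage : List String) (requests : List String) : Int :=
  let m := (storage.headD "").toList.length
  let grid0 : List (List (Option Char)) := storage.map (fun s => (s.toList.take m).map some)
  let n := grid0.length
  let gridf := requests.foldl (fun grid req =>
    if req.toList.length = 1 then
      let t := req.toList.headD ' '
      let reach := pvFloodLoop grid n m (5 * ((n + 2) * (m + 2)) + 1)
        [((0 : Int), (0 : Int))] PySem.Set.empty
      (List.range n).foldl (fun g i =>
        (List.range m).foldl (fun g j =>
          if pvGet2 g i j none = some t ∧
             (reach.contains ((i : Int) + 2, (j : Int) + 1) ||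
              reach.contains ((i : Int), (j : Int) + 1) ||
              reach.contains ((i : Int) + 1, (j : Int) + 2) ||
              reach.contains ((i : Int) + 1, (j : Int))) = true
          then pvSet2 g i j none else g) g) grid
    else
      (List.range n).foldl (fun g i =>
        (List.range m).foldl (fun g j =>
          if pvGet2 g i j none = some (req.toList.headD ' ') then pvSet2 g i j none else g)
          g) grid) grid0
  gridf.foldl (fun a row => row.foldl (fun a x => if x ≠ none then a + 1 else a) a) (0 : Int)

-- ===== PRECONDITION & SPEC =====
-- Pre_ excludes exactly the inputs on which A raises: empty storage (storage[0]),
-- a row shorter than the first row (IndexError when the row is indexed up to column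
-- len(storage[0])-1), and an empty request string when the grid has at least one
-- column (request[0] inside the crane scan; with zero columns that scan never runs).
def Pre_solution (storage : List String) (requests : List String) : Prop :=
  storage ≠ [] ∧ (∀ s ∈ storage, (storage.headD "").length ≤ s.length) ∧
    ((storage.headD "").length = 0 ∨ ∀ r ∈ requests, r ≠ "")

instance (storage : List String) (requests : List String) : Decidable (Pre_solution storage requests) := by
  unfold Pre_solution; infer_instance

def pvWitness_solution : List String × List String := (["AB0", "0AB"], ["B", "AA"])

def Spec_solution (storage : List String) (requests : List String) (out : Int) : Prop :=
  out = solution_alt storage requests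
instance (storage : List String) (requests : List String) (out : Int) : Decidable (Spec_solution storage requests out) := by
  unfold Spec_solution; infer_instance

-- ===== CLAIM (what is proved, stated in full; the proofs are below) =====
def Claim_equal_solution : Prop := ∀ (storage : List String) (requests : List String),
  Dom_solution storage requests → Pre_solution storage requests →
    Spec_solution storage requests (solution storage requests)

-- ===== LEMMAS AND PROOFS =====

-- ---------- grid get/set infrastructure ----------
theorem pvSet2_length {α : Type} (g : List (List α)) (i j : Nat) (v : α) :
    (pvSet2 g i j v).length = g.length := by simp [pvSet2]

theorem pvGetD_set_self {α : Type} (g : List (List α)) (i : Nat) (r : List α) :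
    (g.set i r).getD i [] = if i < g.length then r else g.getD i [] := by
  split
  · simp [List.getD, List.getElem?_set_self, *]
  · rw [List.set_eq_of_length_le (by omega)]

theorem pvGetD_set_ne {α : Type} (g : List (List α)) (i a : Nat) (r : List α) (h : a ≠ i) :
    (g.set i r).getD a [] = g.getD a [] := by
  simp [List.getD, List.getElem?_set_ne (Ne.symm h)]

theorem pvGetD_set_ne' {α : Type} (d : α) (l : List α) (j b : Nat) (v : α) (h : b ≠ j) :
    (l.set j v).getD b d = l.getD b d := by
  simp [List.getD, List.getElem?_set_ne (Ne.symm h)]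

theorem pvGet2_pvSet2_ne {α : Type} (g : List (List α)) (i j a b : Nat) (v : α) (d : α)
    (h : ¬(a = i ∧ b = j)) : pvGet2 (pvSet2 g i j v) a b d = pvGet2 g a b d := by
  unfold pvGet2 pvSet2
  by_cases ha : a = i
  · subst ha
    have hb : b ≠ j := by tauto
    rw [pvGetD_set_self]
    split
    · rw [pvGetD_set_ne' d _ j b v hb]
    · rfl
  · rw [pvGetD_set_ne _ _ _ _ ha]

theorem pvGet2_pvSet2_self {α : Type} (g : List (List α)) (i j : Nat) (v : α) (d : α)
    (hi : i < g.length) (hj : j < (g.getD i []).length) :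
    pvGet2 (pvSet2 g i j v) i j d = v := by
  unfold pvGet2 pvSet2
  rw [pvGetD_set_self]
  simp only [hi, if_pos]
  rw [List.getD, List.getElem?_set_self hj]
  rfl

theorem pvGet2_pvSet2 {α : Type} (g : List (List α)) (i j a b : Nat) (v : α) (d : α)
    (hi : i < g.length) (hj : j < (g.getD i []).length) :
    pvGet2 (pvSet2 g i j v) a b d = if a = i ∧ b = j then v else pvGet2 g a b d := by
  split
  · rcases ‹a = i ∧ b = j› with ⟨rfl, rfl⟩; exact pvGet2_pvSet2_self g a b v d hi hj
  · exact pvGet2_pvSet2_ne g i j a b v d ‹_›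

theorem pvSet2_map_length {α : Type} (g : List (List α)) (i j : Nat) (v : α) :
    (pvSet2 g i j v).map List.length = g.map List.length := by
  unfold pvSet2
  rw [List.map_set]
  by_cases hi : i < g.length
  · have h1 : ((g.getD i []).set j v).length = (g.map List.length)[i]'(by simpa) := by
      simp [List.getD, List.getElem?_eq_getElem hi]
    rw [h1, List.set_getElem_self]
  · rw [List.set_eq_of_length_le (by simpa using Nat.le_of_not_lt hi)]

theorem pvGet2_default_eq {α : Type} (g : List (List α)) (i j : Nat) (d d' : α)
    (hi : i < g.length) (hj : j < (g.getD i []).length) :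
    pvGet2 g i j d = pvGet2 g i j d' := by
  obtain ⟨x, hx⟩ : ∃ x, (g.getD i [])[j]? = some x := ⟨_, List.getElem?_eq_getElem hj⟩
  unfold pvGet2
  simp only [List.getD] at hx ⊢
  rw [hx]
  rfl

-- dims transfer through map-length equality
theorem map_length_len {α : Type} (g g' : List (List α))
    (h : g'.map List.length = g.map List.length) : g'.length = g.length := by
  have := congrArg List.length h; simpa using this

theorem map_length_row {α : Type} (g g' : List (List α))
    (h : g'.map List.length = g.map List.length) (i : Nat) :
    (g'.getD i []).length = (g.getD i []).length := by
  by_cases hi : i < g.length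
  · have hl := map_length_len g g' h
    have hi' : i < g'.length := by omega
    have hx : (g'.map List.length)[i]'(by simpa) = (g.map List.length)[i]'(by simpa) := by
      congr 1
    simp only [List.getElem_map] at hx
    simp [List.getD, List.getElem?_eq_getElem hi, List.getElem?_eq_getElem hi', hx]
  · have hl := map_length_len g g' h
    rw [List.getD, List.getD, List.getElem?_eq_none_iff.2 (by omega),
      List.getElem?_eq_none_iff.2 (by omega)]

theorem rows_iff_getD {α : Type} (g : List (List α)) (P : Nat → Prop) :
    (∀ row ∈ g, P row.length) ↔ (∀ i < g.length, P (g.getD i []).length) := by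
  constructor
  · intro h i hi
    have : g.getD i [] = g[i] := by simp [List.getD, List.getElem?_eq_getElem hi]
    rw [this]; exact h _ (List.getElem_mem hi)
  · intro h row hrow
    rcases List.mem_iff_getElem.1 hrow with ⟨i, hi, rfl⟩
    have : g.getD i [] = g[i] := by simp [List.getD, List.getElem?_eq_getElem hi]
    rw [← this]; exact h i hi


-- ---------- false-count (the BFS fuel measure) ----------
theorem countP_set_true (row : List Bool) (j : Nat) (hj : j < row.length)
    (hf : row.getD j false = false) :
    (row.set j true).countP (fun b => !b) + 1 = row.countP (fun b => !b) := by
  induction row generalizing j with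
  | nil => simp at hj
  | cons x xs ih =>
    cases j with
    | zero =>
      simp [List.getD] at hf
      subst hf
      simp [List.countP_cons]
    | succ j =>
      have hj' : j < xs.length := by simpa using hj
      have hf' : xs.getD j false = false := by simpa [List.getD] using hf
      have := ih j hj' hf'
      simp only [List.set_cons_succ, List.countP_cons]
      omega

theorem pvFalseCount_set (vis : List (List Bool)) (i j : Nat) (hi : i < vis.length)
    (hj : j < (vis.getD i []).length) (hf : pvGet2 vis i j false = false) :
    pvFalseCount (pvSet2 vis i j true) + 1 = pvFalseCount vis := by
  induction vis generalizing i with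
  | nil => simp at hi
  | cons r rs ih =>
    cases i with
    | zero =>
      have hj0 : j < r.length := by simpa [List.getD] using hj
      have hf0 : r.getD j false = false := by simpa [pvGet2, List.getD] using hf
      have := countP_set_true r j hj0 hf0
      simp only [pvSet2, pvFalseCount, List.getD_cons_zero, List.set_cons_zero,
        List.map_cons, List.sum_cons]
      simp only [pvFalseCount] at this ⊢
      omega
    | succ i =>
      have hi' : i < rs.length := by simpa using hi
      have hj' : j < (rs.getD i []).length := by simpa [List.getD] using hj
      have hf' : pvGet2 rs i j false = false := by simpa [pvGet2, List.getD] using hf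
      have := ih i hi' hj' hf'
      simp only [pvSet2, pvFalseCount, List.getD_cons_succ, List.set_cons_succ,
        List.map_cons, List.sum_cons] at this ⊢
      omega

-- ---------- padded-frame geometry ----------
abbrev pvInBox (n m : Nat) (p : Int × Int) : Prop :=
  0 ≤ p.1 ∧ p.1 < (n : Int) + 2 ∧ 0 ≤ p.2 ∧ p.2 < (m : Int) + 2

abbrev pvInterior (n m : Nat) (p : Int × Int) : Prop :=
  1 ≤ p.1 ∧ p.1 ≤ (n : Int) ∧ 1 ≤ p.2 ∧ p.2 ≤ (m : Int)

-- the padded value of cell p, read from the unpadded cell function v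
def pvValF (v : Nat → Nat → Option Char) (n m : Nat) (p : Int × Int) : Option Char :=
  if pvInterior n m p then v (p.1.toNat - 1) (p.2.toNat - 1) else none

def pvEmp (v : Nat → Nat → Option Char) (n m : Nat) (p : Int × Int) : Prop :=
  pvInBox n m p ∧ pvValF v n m p = none

inductive pvReach (E : Int × Int → Prop) : Int × Int → Prop
  | base : pvReach E (0, 0)
  | step {p q : Int × Int} : pvReach E p → q ∈ pvNbrs p → E q → pvReach E q

theorem pvEmp_origin (v : Nat → Nat → Option Char) (n m : Nat) : pvEmp v n m (0, 0) := by
  refine ⟨⟨by omega, by omega, by omega, by omega⟩, ?_⟩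
  simp [pvValF]

theorem pvReach_emp {v : Nat → Nat → Option Char} {n m : Nat} {p : Int × Int}
    (h : pvReach (pvEmp v n m) p) : pvEmp v n m p := by
  cases h with
  | base => exact pvEmp_origin v n m
  | step _ _ hE => exact hE

theorem mem_pvNbrs (p q : Int × Int) : q ∈ pvNbrs p ↔
    ((q.1 = p.1 + 1 ∧ q.2 = p.2) ∨ (q.1 = p.1 - 1 ∧ q.2 = p.2) ∨
     (q.1 = p.1 ∧ q.2 = p.2 + 1) ∨ (q.1 = p.1 ∧ q.2 = p.2 - 1)) := by
  simp [pvNbrs, Prod.ext_iff]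

-- congruence: reachability only depends on the cells below (n, m)
theorem pvValF_congr {v v' : Nat → Nat → Option Char} {n m : Nat}
    (h : ∀ i j, i < n → j < m → v i j = v' i j) (p : Int × Int) :
    pvValF v n m p = pvValF v' n m p := by
  unfold pvValF
  split
  · rename_i hint
    exact h _ _ (by omega) (by omega)
  · rfl

-- ---------- stack-push fold (B's four candidate pushes) ----------
theorem push_fold (guard : Int × Int → Bool) (l st : List (Int × Int)) :
    (l.foldl (fun st q => if guard q then q :: st else st) st).length ≤ st.length + l.length ∧
    (∀ x, x ∈ l.foldl (fun st q => if guard q then q :: st else st) st ↔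
      x ∈ st ∨ (x ∈ l ∧ guard x = true)) := by
  induction l generalizing st with
  | nil => simp
  | cons a l ih =>
    simp only [List.foldl_cons]
    constructor
    · by_cases h : guard a = true <;> simp only [h] <;>
        [skip; simp only [Bool.false_eq_true, if_false]]
      · have := (ih (a :: st)).1
        simp only [if_true, List.length_cons] at this ⊢
        omega
      · have := (ih st).1
        simp only [List.length_cons] at this ⊢
        omega
    · intro x
      rw [(ih _).2]
      by_cases h : guard a = true
      · simp only [h, if_true, List.mem_cons]
        constructor
        · rintro ((rfl | hx) | ⟨hx, hg⟩) <;> tauto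
        · rintro (hx | ⟨rfl | hx, hg⟩) <;> tauto
      · simp only [h, Bool.false_eq_true, if_false, List.mem_cons]
        constructor
        · rintro (hx | ⟨hx, hg⟩) <;> tauto
        · rintro (hx | ⟨rfl | hx, hg⟩)
          · tauto
          · exact absurd hg h
          · tauto


-- ---------- generic once-per-cell grid pass ----------
theorem grid_fold_inner {α : Type} (d : α) (m b N M A : Nat)
    (upd : List (List α) → Nat → List (List α)) (F : Nat → α → α)
    (hlen : ∀ g j, j < m → (upd g j).map List.length = g.map List.length)
    (hget : ∀ g j, j < m → g.length = N → (∀ row ∈ g, M ≤ row.length) →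
      ∀ i' j', pvGet2 (upd g j) i' j' d =
        if i' = A ∧ j' = j + b then F j (pvGet2 g A (j + b) d) else pvGet2 g i' j' d) :
    ∀ (k : Nat), k ≤ m → ∀ g, g.length = N → (∀ row ∈ g, M ≤ row.length) →
      (((List.range k).foldl (fun g j => upd g j) g).map List.length = g.map List.length ∧
       ∀ i' j', pvGet2 ((List.range k).foldl (fun g j => upd g j) g) i' j' d =
         if i' = A ∧ b ≤ j' ∧ j' < k + b then F (j' - b) (pvGet2 g i' j' d)
         else pvGet2 g i' j' d) := by
  intro k
  induction k with
  | zero => intro _ g hg hr; simp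
  | succ k ih =>
    intro hk g hg hr
    obtain ⟨ihlen, ihget⟩ := ih (by omega) g hg hr
    have hgklen : ((List.range k).foldl (fun g j => upd g j) g).length = N := by
      rw [map_length_len g _ ihlen]; exact hg
    have hgkrows : ∀ row ∈ (List.range k).foldl (fun g j => upd g j) g, M ≤ row.length := by
      rw [rows_iff_getD]
      intro i hi
      rw [map_length_row g _ ihlen i]
      exact (rows_iff_getD g _).1 hr i (by rw [hgklen] at hi; omega)
    rw [List.range_succ, List.foldl_append]
    simp only [List.foldl_cons, List.foldl_nil]
    constructor
    · rw [hlen _ k (by omega), ihlen]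
    · intro i' j'
      rw [hget _ k (by omega) hgklen hgkrows i' j']
      by_cases h1 : i' = A ∧ j' = k + b
      · rcases h1 with ⟨rfl, rfl⟩
        rw [if_pos ⟨rfl, rfl⟩, ihget, if_neg (by omega), if_pos (by omega)]
        congr 1
        omega
      · rw [if_neg h1, ihget]
        by_cases h2 : i' = A ∧ b ≤ j' ∧ j' < k + b
        · rw [if_pos h2, if_pos (by omega)]
        · rw [if_neg h2, if_neg (by omega)]

theorem grid_fold_spec {α : Type} (d : α) (n m a b N M : Nat)
    (upd : List (List α) → Nat → Nat → List (List α)) (F : Nat → Nat → α → α)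
    (hlen : ∀ g i j, i < n → j < m → (upd g i j).map List.length = g.map List.length)
    (hget : ∀ g i j, i < n → j < m → g.length = N → (∀ row ∈ g, M ≤ row.length) →
      ∀ i' j', pvGet2 (upd g i j) i' j' d =
        if i' = i + a ∧ j' = j + b then F i j (pvGet2 g (i + a) (j + b) d)
        else pvGet2 g i' j' d)
    (g0 : List (List α)) (h0 : g0.length = N) (hr : ∀ row ∈ g0, M ≤ row.length) :
    ((List.range n).foldl (fun g i => (List.range m).foldl (fun g j => upd g i j) g) g0).map
        List.length = g0.map List.length ∧
    ∀ i' j',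
      pvGet2 ((List.range n).foldl
          (fun g i => (List.range m).foldl (fun g j => upd g i j) g) g0) i' j' d =
        if a ≤ i' ∧ i' < n + a ∧ b ≤ j' ∧ j' < m + b
        then F (i' - a) (j' - b) (pvGet2 g0 i' j' d) else pvGet2 g0 i' j' d := by
  suffices h : ∀ (k : Nat), k ≤ n →
      (((List.range k).foldl (fun g i => (List.range m).foldl (fun g j => upd g i j) g) g0).map
          List.length = g0.map List.length ∧
       ∀ i' j',
         pvGet2 ((List.range k).foldl
             (fun g i => (List.range m).foldl (fun g j => upd g i j) g) g0) i' j' d =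
           if a ≤ i' ∧ i' < k + a ∧ b ≤ j' ∧ j' < m + b
           then F (i' - a) (j' - b) (pvGet2 g0 i' j' d) else pvGet2 g0 i' j' d) by
    exact h n (le_refl n)
  intro k
  induction k with
  | zero =>
    intro _
    refine ⟨by simp, ?_⟩
    intro i' j'
    rw [List.range_zero, List.foldl_nil, if_neg (by omega)]
  | succ k ih =>
    intro hk
    obtain ⟨ihlen, ihget⟩ := ih (by omega)
    have hgklen : ((List.range k).foldl
        (fun g i => (List.range m).foldl (fun g j => upd g i j) g) g0).length = N := by
      rw [map_length_len g0 _ ihlen]; exact h0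
    have hgkrows : ∀ row ∈ (List.range k).foldl
        (fun g i => (List.range m).foldl (fun g j => upd g i j) g) g0, M ≤ row.length := by
      rw [rows_iff_getD]
      intro i hi
      rw [map_length_row g0 _ ihlen i]
      exact (rows_iff_getD g0 _).1 hr i (by rw [hgklen] at hi; omega)
    rw [List.range_succ, List.foldl_append]
    simp only [List.foldl_cons, List.foldl_nil]
    obtain ⟨innlen, innget⟩ := grid_fold_inner d m b N M (k + a)
      (fun g j => upd g k j) (fun j x => F k j x)
      (fun g j hj => hlen g k j (by omega) hj)
      (fun g j hj hg hr' => hget g k j (by omega) hj hg hr')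
      m (le_refl m) _ hgklen hgkrows
    constructor
    · rw [innlen, ihlen]
    · intro i' j'
      rw [innget i' j']
      by_cases h1 : i' = k + a ∧ b ≤ j' ∧ j' < m + b
      · rcases h1 with ⟨rfl, hj'⟩
        rw [if_pos ⟨rfl, hj'⟩, ihget, if_neg (by omega), if_pos (by omega)]
        congr 1
        omega
      · rw [if_neg h1, ihget]
        by_cases h2 : a ≤ i' ∧ i' < k + a ∧ b ≤ j' ∧ j' < m + b
        · rw [if_pos h2, if_pos (by omega)]
        · rw [if_neg h2, if_neg (by omega)]


-- ---------- B's flood fill computes reachability ----------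
def pvBoxCnt (n m : Nat) (reach : List (Int × Int)) : Nat :=
  (reach.filter (fun p => decide (pvInBox n m p))).length

theorem nodup_box_card (n m : Nat) (l : List (Int × Int)) (hnd : l.Nodup)
    (hbox : ∀ p ∈ l, pvInBox n m p) : l.length ≤ (n + 2) * (m + 2) := by
  have h1 : l.toFinset ⊆
      (Finset.Icc (0 : Int) ((n : Int) + 1)) ×ˢ (Finset.Icc (0 : Int) ((m : Int) + 1)) := by
    intro p hp
    have hb := hbox p (List.mem_toFinset.1 hp)
    simp only [Finset.mem_product, Finset.mem_Icc]
    omega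
  have h2 := Finset.card_le_card h1
  rw [Finset.card_product, List.toFinset_card_of_nodup hnd, Int.card_Icc, Int.card_Icc] at h2
  have e1 : ((n : Int) + 1 + 1 - 0).toNat = n + 2 := by omega
  have e2 : ((m : Int) + 1 + 1 - 0).toNat = m + 2 := by omega
  rw [e1, e2] at h2
  exact h2

theorem pvBoxCnt_le (n m : Nat) (reach : List (Int × Int)) (hnd : reach.Nodup)
    (hbox : ∀ p ∈ reach, pvInBox n m p) : pvBoxCnt n m reach ≤ (n + 2) * (m + 2) := by
  refine nodup_box_card n m _ (hnd.filter _) ?_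
  intro p hp
  exact hbox p (List.mem_of_mem_filter hp)

theorem pvBoxCnt_append (n m : Nat) (reach : List (Int × Int)) (p : Int × Int)
    (hp : pvInBox n m p) : pvBoxCnt n m (reach ++ [p]) = pvBoxCnt n m reach + 1 := by
  unfold pvBoxCnt
  rw [List.filter_append]
  simp [hp]

theorem pvEmptyAt_iff (grid : List (List (Option Char))) (n m : Nat)
    (v : Nat → Nat → Option Char)
    (hv : ∀ i j, i < n → j < m → v i j = pvGet2 grid i j none)
    (hlen : grid.length = n) (hrows : ∀ row ∈ grid, m ≤ row.length)
    (p : Int × Int) (hbox : pvInBox n m p) :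
    (pvEmptyAt grid n m p = true) ↔ pvValF v n m p = none := by
  unfold pvEmptyAt pvValF
  by_cases hborder : p.1 = 0 ∨ p.1 = (n : Int) + 1 ∨ p.2 = 0 ∨ p.2 = (m : Int) + 1
  · have hni : ¬ pvInterior n m p := by simp only [pvInterior]; omega
    rw [if_neg hni]
    rcases hborder with h | h | h | h <;> simp [h]
  · have hint : pvInterior n m p := by simp only [pvInterior]; omega
    rw [if_pos hint]
    have h1 : (p.1 == (0 : Int)) = false := by simp; omega
    have h2 : (p.1 == (n : Int) + 1) = false := by simp; omega
    have h3 : (p.2 == (0 : Int)) = false := by simp; omega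
    have h4 : (p.2 == (m : Int) + 1) = false := by simp; omega
    rw [h1, h2, h3, h4]
    simp only [Bool.false_or]
    have e1 : (p.1 - 1).toNat = p.1.toNat - 1 := by omega
    have e2 : (p.2 - 1).toNat = p.2.toNat - 1 := by omega
    have hin1 : p.1.toNat - 1 < n := by omega
    have hin2 : p.2.toNat - 1 < m := by omega
    have hrow : m ≤ (grid.getD (p.1.toNat - 1) []).length :=
      (rows_iff_getD grid _).1 hrows _ (by omega)
    rw [e1, e2, hv _ _ hin1 hin2,
      pvGet2_default_eq grid _ _ (some ' ') none (by omega) (by omega)]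
    simp

theorem flood_done (v : Nat → Nat → Option Char) (n m : Nat) (reach : List (Int × Int))
    (I2 : ∀ p ∈ reach, pvReach (pvEmp v n m) p)
    (I3 : ∀ p ∈ reach, ∀ q ∈ pvNbrs p, pvEmp v n m q → (q ∈ reach ∨ q ∈ ([] : List (Int × Int))))
    (I4 : ((0, 0) : Int × Int) ∈ reach ∨ ((0, 0) : Int × Int) ∈ ([] : List (Int × Int))) :
    ∀ q, q ∈ reach ↔ pvReach (pvEmp v n m) q := by
  intro q
  constructor
  · exact I2 q
  · intro h
    induction h with
    | base =>
      rcases I4 with h | h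
      · exact h
      · simp at h
    | step hp hq hE ih =>
      rcases I3 _ ih _ hq hE with h | h
      · exact h
      · simp at h

theorem flood_loop_correct (grid : List (List (Option Char))) (n m : Nat)
    (v : Nat → Nat → Option Char)
    (hv : ∀ i j, i < n → j < m → v i j = pvGet2 grid i j none)
    (hlen : grid.length = n) (hrows : ∀ row ∈ grid, m ≤ row.length) :
    ∀ (fuel : Nat) (stack : List (Int × Int)) (reach : PySem.Set (Int × Int)),
      5 * ((n + 2) * (m + 2) - pvBoxCnt n m reach) + stack.length ≤ fuel →
      reach.Nodup →
      (∀ p ∈ stack, pvReach (pvEmp v n m) p) →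
      (∀ p ∈ reach, pvReach (pvEmp v n m) p) →
      (∀ p ∈ reach, ∀ q ∈ pvNbrs p, pvEmp v n m q → (q ∈ reach ∨ q ∈ stack)) →
      (((0, 0) : Int × Int) ∈ reach ∨ ((0, 0) : Int × Int) ∈ stack) →
      ∀ q, q ∈ pvFloodLoop grid n m fuel stack reach ↔ pvReach (pvEmp v n m) q := by
  intro fuel
  induction fuel with
  | zero =>
    intro stack reach hfuel hnd I1 I2 I3 I4
    have hstack : stack = [] := by
      cases stack with
      | nil => rfl
      | cons a l => simp only [List.length_cons] at hfuel; omega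
    subst hstack
    exact flood_done v n m reach I2 I3 I4
  | succ fuel ih =>
    intro stack reach hfuel hnd I1 I2 I3 I4
    cases stack with
    | nil => exact flood_done v n m reach I2 I3 I4
    | cons p stack =>
      show ∀ q, q ∈ (if reach.contains p then pvFloodLoop grid n m fuel stack reach
          else _) ↔ _
      by_cases hc : reach.contains p = true
      · rw [if_pos hc]
        refine ih stack reach (by simp at hfuel; omega) hnd
          (fun x hx => I1 x (List.mem_cons_of_mem _ hx)) I2 ?_ ?_
        · intro x hx q hq hE
          rcases I3 x hx q hq hE with h | h
          · exact Or.inl h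
          · rcases List.mem_cons.1 h with rfl | h
            · exact Or.inl ((PySem.Set.contains_iff _ _).1 hc)
            · exact Or.inr h
        · rcases I4 with h | h
          · exact Or.inl h
          · rcases List.mem_cons.1 h with h0 | h
            · exact Or.inl (h0 ▸ (PySem.Set.contains_iff _ _).1 hc)
            · exact Or.inr h
      · rw [if_neg hc]
        have hpnot : p ∉ reach := fun h => hc ((PySem.Set.contains_iff _ _).2 h)
        have hReachp : pvReach (pvEmp v n m) p := I1 p List.mem_cons_self
        have hpbox : pvInBox n m p := (pvReach_emp hReachp).1
        have hadd : PySem.Set.add reach p = reach ++ [p] := PySem.Set.add_of_not_mem hpnot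
        have hnd' : (PySem.Set.add reach p).Nodup := PySem.Set.nodup_add _ _ hnd
        have hmemadd : ∀ x, x ∈ PySem.Set.add reach p ↔ x ∈ reach ∨ x = p := by
          intro x; exact PySem.Set.mem_add ..
        obtain ⟨hplen, hpmem⟩ := push_fold
          (fun q => (decide (0 ≤ q.1) && decide (q.1 ≤ (n : Int) + 1) &&
              decide (0 ≤ q.2) && decide (q.2 ≤ (m : Int) + 1)) &&
            pvEmptyAt grid n m q && !((PySem.Set.add reach p).contains q))
          (pvNbrs p) stack
        have hguard : ∀ q, ((decide (0 ≤ q.1) && decide (q.1 ≤ (n : Int) + 1) &&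
              decide (0 ≤ q.2) && decide (q.2 ≤ (m : Int) + 1)) &&
            pvEmptyAt grid n m q && !((PySem.Set.add reach p).contains q)) = true ↔
            (pvInBox n m q ∧ pvEmptyAt grid n m q = true ∧ q ∉ PySem.Set.add reach p) := by
          intro q
          simp only [Bool.and_eq_true, Bool.not_eq_true', decide_eq_true_eq]
          constructor
          · rintro ⟨⟨⟨h1, h2⟩, h3⟩, h4⟩
            refine ⟨by omega, h3, fun hmem => ?_⟩
            rw [(PySem.Set.contains_iff _ _).2 hmem] at h4; cases h4
          · rintro ⟨hb, he, hnm⟩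
            refine ⟨⟨⟨by omega, by omega⟩, he⟩, ?_⟩
            cases hcq : (PySem.Set.add reach p).contains q
            · rfl
            · exact absurd ((PySem.Set.contains_iff _ _).1 hcq) hnm
        have hE_of_guard : ∀ q ∈ pvNbrs p, pvInBox n m q → pvEmptyAt grid n m q = true →
            pvEmp v n m q := by
          intro q _ hb he
          exact ⟨hb, (pvEmptyAt_iff grid n m v hv hlen hrows q hb).1 he⟩
        refine ih _ (PySem.Set.add reach p) ?_ hnd' ?_ ?_ ?_ ?_
        · -- fuel bound
          have hcnt : pvBoxCnt n m (PySem.Set.add reach p) = pvBoxCnt n m reach + 1 := by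
            rw [hadd]; exact pvBoxCnt_append n m reach p hpbox
          have hboxmem : ∀ x ∈ PySem.Set.add reach p, pvInBox n m x := by
            intro x hx
            rcases (hmemadd x).1 hx with h | rfl
            · exact (pvReach_emp (I2 x h)).1
            · exact hpbox
          have hle := pvBoxCnt_le n m (PySem.Set.add reach p) hnd' hboxmem
          have h4 : (pvNbrs p).length = 4 := by simp [pvNbrs]
          rw [h4] at hplen
          simp only [List.length_cons] at hfuel
          omega
        · -- I1
          intro x hx
          rcases (hpmem x).1 hx with h | ⟨hmem, hg⟩
          · exact I1 x (List.mem_cons_of_mem _ h)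
          · rcases (hguard x).1 hg with ⟨hb, he, _⟩
            exact pvReach.step hReachp hmem (hE_of_guard x hmem hb he)
        · -- I2
          intro x hx
          rcases (hmemadd x).1 hx with h | rfl
          · exact I2 x h
          · exact hReachp
        · -- I3
          intro x hx q hq hE
          rcases (hmemadd x).1 hx with h | rfl
          · rcases I3 x h q hq hE with h' | h'
            · exact Or.inl ((hmemadd q).2 (Or.inl h'))
            · rcases List.mem_cons.1 h' with rfl | h'
              · exact Or.inl ((hmemadd q).2 (Or.inr rfl))
              · exact Or.inr ((hpmem q).2 (Or.inl h'))
          · by_cases hqr : q ∈ PySem.Set.add reach x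
            · exact Or.inl hqr
            · refine Or.inr ((hpmem q).2 (Or.inr ⟨hq, (hguard q).2 ⟨hE.1, ?_, hqr⟩⟩))
              exact (pvEmptyAt_iff grid n m v hv hlen hrows q hE.1).2 hE.2
        · -- I4
          rcases I4 with h | h
          · exact Or.inl ((hmemadd _).2 (Or.inl h))
          · rcases List.mem_cons.1 h with h0 | h
            · exact Or.inl ((hmemadd _).2 (Or.inr h0))
            · exact Or.inr ((hpmem _).2 (Or.inl h))

theorem flood_correct (grid : List (List (Option Char))) (n m : Nat)
    (v : Nat → Nat → Option Char)
    (hv : ∀ i j, i < n → j < m → v i j = pvGet2 grid i j none)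
    (hlen : grid.length = n) (hrows : ∀ row ∈ grid, m ≤ row.length) :
    ∀ q, (pvFloodLoop grid n m (5 * ((n + 2) * (m + 2)) + 1)
        [((0 : Int), (0 : Int))] PySem.Set.empty).contains q = true ↔
      pvReach (pvEmp v n m) q := by
  intro q
  rw [PySem.Set.contains_iff _ _]
  refine flood_loop_correct grid n m v hv hlen hrows _ _ _ ?_ ?_ ?_ ?_ ?_ ?_ q
  · simp [pvBoxCnt, PySem.Set.empty]
  · simp [PySem.Set.empty]
  · intro p hp
    rcases List.mem_cons.1 hp with rfl | h
    · exact pvReach.base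
    · simp at h
  · simp [PySem.Set.empty]
  · simp [PySem.Set.empty]
  · simp


-- ---------- A's BFS computes the same reachability ----------
abbrev pvVisRaw (vis : List (List Bool)) (p : Int × Int) : Prop :=
  pvGet2 vis p.1.toNat p.2.toNat false = true

-- loop invariant of A's while loop; `excl` is the cell whose neighbours are mid-processing
structure BfsInv (n m : Nat) (v : Nat → Nat → Option Char) (t : Char)
    (excl : Int × Int → Prop) (queue : List (Int × Int)) (vis : List (List Bool))
    (g : List (List (Option Char))) : Prop where
  dvisl : vis.length = n + 2
  dvisr : ∀ row ∈ vis, row.length = m + 2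
  dgl : g.length = n + 2
  dgr : ∀ row ∈ g, row.length = m + 2
  q1 : ∀ p ∈ queue, pvInBox n m p ∧ pvEmp v n m p ∧ pvReach (pvEmp v n m) p ∧ pvVisRaw vis p
  v0 : pvVisRaw vis (0, 0)
  v4 : ∀ p, pvInBox n m p → pvVisRaw vis p →
      (p = (0, 0) ∨ ∃ r, pvReach (pvEmp v n m) r ∧ p ∈ pvNbrs r)
  v5 : ∀ p, pvInBox n m p → pvVisRaw vis p → pvEmp v n m p → p ∉ queue → ¬ excl p →
      ∀ q, pvInBox n m q → q ∈ pvNbrs p → pvVisRaw vis q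
  gv : ∀ p, pvInBox n m p → pvGet2 g p.1.toNat p.2.toNat none =
      (if pvVisRaw vis p ∧ pvValF v n m p = some t then none else pvValF v n m p)

theorem offset_mem_nbrs (x y : Int) (d : Nat) (hd : d < 4) :
    (x + pvDx.getD d 0, y + pvDy.getD d 0) ∈ pvNbrs (x, y) := by
  rw [mem_pvNbrs]
  interval_cases d <;> simp [pvDx, pvDy, List.getD] <;> omega

theorem nbrs_offset (p q : Int × Int) (h : q ∈ pvNbrs p) :
    ∃ d, d < 4 ∧ q = (p.1 + pvDx.getD d 0, p.2 + pvDy.getD d 0) := by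
  rw [mem_pvNbrs] at h
  rcases h with ⟨h1, h2⟩ | ⟨h1, h2⟩ | ⟨h1, h2⟩ | ⟨h1, h2⟩
  · exact ⟨1, by omega, by rw [Prod.ext_iff]; simp [pvDx, pvDy, List.getD]; omega⟩
  · exact ⟨3, by omega, by rw [Prod.ext_iff]; simp [pvDx, pvDy, List.getD]; omega⟩
  · exact ⟨0, by omega, by rw [Prod.ext_iff]; simp [pvDx, pvDy, List.getD]; omega⟩
  · exact ⟨2, by omega, by rw [Prod.ext_iff]; simp [pvDx, pvDy, List.getD]; omega⟩

theorem bfs_step_inv (n m : Nat) (v : Nat → Nat → Option Char) (t : Char) (x y : Int)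
    (d : Nat) (hd : d < 4) (queue : List (Int × Int)) (vis : List (List Bool))
    (g : List (List (Option Char)))
    (hpbox : pvInBox n m (x, y)) (hpemp : pvEmp v n m (x, y))
    (hpreach : pvReach (pvEmp v n m) (x, y))
    (hInv : BfsInv n m v t (fun p => p = (x, y)) queue vis g) :
    BfsInv n m v t (fun p => p = (x, y)) (bfsStep n m t x y (queue, vis, g) d).1
      (bfsStep n m t x y (queue, vis, g) d).2.1 (bfsStep n m t x y (queue, vis, g) d).2.2 ∧
    (∀ r, pvVisRaw vis r → pvVisRaw (bfsStep n m t x y (queue, vis, g) d).2.1 r) ∧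
    (∀ r ∈ queue, r ∈ (bfsStep n m t x y (queue, vis, g) d).1) ∧
    (pvInBox n m (x + pvDx.getD d 0, y + pvDy.getD d 0) →
      pvVisRaw (bfsStep n m t x y (queue, vis, g) d).2.1
        (x + pvDx.getD d 0, y + pvDy.getD d 0)) ∧
    pvFalseCount (bfsStep n m t x y (queue, vis, g) d).2.1 +
      (bfsStep n m t x y (queue, vis, g) d).1.length ≤ pvFalseCount vis + queue.length := by
  have hnbr := offset_mem_nbrs x y d hd
  set nx := x + pvDx.getD d 0 with hnx
  set ny := y + pvDy.getD d 0 with hny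
  by_cases hC : 0 ≤ nx ∧ nx < (n : Int) + 2 ∧ 0 ≤ ny ∧ ny < (m : Int) + 2
  · -- in the frame
    by_cases hV : pvGet2 vis nx.toNat ny.toNat false = true
    · -- already visited: skip
      have hs : bfsStep n m t x y (queue, vis, g) d = (queue, vis, g) := by
        simp only [bfsStep, ← hnx, ← hny]
        rw [if_neg (by exact fun h => h hC), if_pos hV]
      rw [hs]
      exact ⟨hInv, fun r h => h, fun r h => h, fun _ => hV, le_refl _⟩
    · -- fresh cell
      have hnqbox : pvInBox n m (nx, ny) := hC
      have hia : nx.toNat < vis.length := by rw [hInv.dvisl]; omega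
      have hja : ny.toNat < (vis.getD nx.toNat []).length := by
        rw [(rows_iff_getD vis (fun l => l = m + 2)).1 hInv.dvisr nx.toNat hia]; omega
      have hga : nx.toNat < g.length := by rw [hInv.dgl]; omega
      have hgb : ny.toNat < (g.getD nx.toNat []).length := by
        rw [(rows_iff_getD g (fun l => l = m + 2)).1 hInv.dgr nx.toNat hga]; omega
      have hVfalse : pvGet2 vis nx.toNat ny.toNat false = false := by
        cases h : pvGet2 vis nx.toNat ny.toNat false
        · rfl
        · exact absurd h hV
      have hcell : pvGet2 g nx.toNat ny.toNat none = pvValF v n m (nx, ny) := by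
        rw [hInv.gv (nx, ny) hnqbox]
        rw [if_neg]
        rintro ⟨hvr, -⟩
        exact hV hvr
      -- facts about the updated visited matrix
      have hvset : ∀ (a b : Nat), pvGet2 (pvSet2 vis nx.toNat ny.toNat true) a b false =
          if a = nx.toNat ∧ b = ny.toNat then true else pvGet2 vis a b false :=
        fun a b => pvGet2_pvSet2 vis nx.toNat ny.toNat a b true false hia hja
      have hmono : ∀ r, pvVisRaw vis r → pvVisRaw (pvSet2 vis nx.toNat ny.toNat true) r := by
        intro r hr
        unfold pvVisRaw at hr ⊢
        rw [hvset]
        split <;> simp [hr]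
      have hnqvis : pvVisRaw (pvSet2 vis nx.toNat ny.toNat true) (nx, ny) := by
        unfold pvVisRaw
        rw [hvset, if_pos ⟨rfl, rfl⟩]
      have hvisbox : ∀ r, pvInBox n m r →
          (pvVisRaw (pvSet2 vis nx.toNat ny.toNat true) r ↔ (r = (nx, ny) ∨ pvVisRaw vis r)) := by
        intro r hrbox
        unfold pvVisRaw
        rw [hvset]
        constructor
        · intro h
          by_cases heq : r.1.toNat = nx.toNat ∧ r.2.toNat = ny.toNat
          · left
            have : r.1 = nx ∧ r.2 = ny := by
              obtain ⟨hb1, hb2, hb3, hb4⟩ := hrbox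
              obtain ⟨hc1, hc2, hc3, hc4⟩ := hC
              omega
            exact Prod.ext_iff.2 this
          · right; rwa [if_neg heq] at h
        · rintro (rfl | h)
          · rw [if_pos ⟨rfl, rfl⟩]
          · split
            · rfl
            · exact h
      have hdvisl' : (pvSet2 vis nx.toNat ny.toNat true).length = n + 2 := by
        rw [pvSet2_length]; exact hInv.dvisl
      have hdvisr' : ∀ row ∈ pvSet2 vis nx.toNat ny.toNat true, row.length = m + 2 := by
        refine (rows_iff_getD _ (fun l => l = m + 2)).2 ?_
        intro i hi
        rw [map_length_row vis _ (pvSet2_map_length vis nx.toNat ny.toNat true) i]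
        exact (rows_iff_getD vis (fun l => l = m + 2)).1 hInv.dvisr i
          (by rw [hdvisl'] at hi; rw [hInv.dvisl]; omega)
      have hFC : pvFalseCount (pvSet2 vis nx.toNat ny.toNat true) + 1 = pvFalseCount vis :=
        pvFalseCount_set vis nx.toNat ny.toNat hia hja hVfalse
      have hv4' : ∀ p, pvInBox n m p → pvVisRaw (pvSet2 vis nx.toNat ny.toNat true) p →
          (p = (0, 0) ∨ ∃ r, pvReach (pvEmp v n m) r ∧ p ∈ pvNbrs r) := by
        intro p hpb hpv
        rcases (hvisbox p hpb).1 hpv with rfl | h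
        · exact Or.inr ⟨(x, y), hpreach, hnbr⟩
        · exact hInv.v4 p hpb h
      by_cases hT : pvGet2 g nx.toNat ny.toNat none = some t
      · -- target found: zero it
        have hs : bfsStep n m t x y (queue, vis, g) d =
            (queue, pvSet2 vis nx.toNat ny.toNat true,
             pvSet2 g nx.toNat ny.toNat none) := by
          simp only [bfsStep, ← hnx, ← hny]
          rw [if_neg (by exact fun h => h hC), if_neg hV, if_pos hT]
        rw [hs]
        have hvalt : pvValF v n m (nx, ny) = some t := by rw [← hcell]; exact hT
        refine ⟨⟨hdvisl', hdvisr', by rw [pvSet2_length]; exact hInv.dgl, ?_, ?_, ?_, hv4', ?_, ?_⟩,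
          hmono, fun r h => h, fun _ => hnqvis, ?_⟩
        · refine (rows_iff_getD _ (fun l => l = m + 2)).2 ?_
          intro i hi
          rw [map_length_row g _ (pvSet2_map_length g nx.toNat ny.toNat none) i]
          exact (rows_iff_getD g (fun l => l = m + 2)).1 hInv.dgr i
            (by rw [pvSet2_length, hInv.dgl] at hi; rw [hInv.dgl]; omega)
        · intro p hp
          obtain ⟨hb, he, hr, hvz⟩ := hInv.q1 p hp
          exact ⟨hb, he, hr, hmono p hvz⟩
        · exact hmono _ hInv.v0
        · -- v5
          intro p hpb hpv hpe hpq hpx q hqb hqn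
          rcases (hvisbox p hpb).1 hpv with rfl | h
          · rw [hpe.2] at hvalt; cases hvalt
          · exact hmono q (hInv.v5 p hpb h hpe hpq hpx q hqb hqn)
        · -- gv
          intro p hpb
          have hgset : ∀ (a b : Nat), pvGet2 (pvSet2 g nx.toNat ny.toNat none) a b none =
              if a = nx.toNat ∧ b = ny.toNat then none else pvGet2 g a b none :=
            fun a b => pvGet2_pvSet2 g nx.toNat ny.toNat a b none none hga hgb
          rw [hgset]
          by_cases hpe : p = (nx, ny)
          · subst hpe
            rw [if_pos ⟨rfl, rfl⟩, if_pos ⟨hnqvis, hvalt⟩]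
          · have hne : ¬ (p.1.toNat = nx.toNat ∧ p.2.toNat = ny.toNat) := by
              intro hcon
              apply hpe
              obtain ⟨hb1, hb2, hb3, hb4⟩ := hpb
              obtain ⟨hc1, hc2, hc3, hc4⟩ := hC
              exact Prod.ext_iff.2 (by omega)
            rw [if_neg hne, hInv.gv p hpb]
            have : pvVisRaw (pvSet2 vis nx.toNat ny.toNat true) p ↔ pvVisRaw vis p := by
              rw [hvisbox p hpb]
              constructor
              · rintro (rfl | h)
                · exact absurd rfl hpe
                · exact h
              · exact Or.inr
            rw [if_congr (and_congr_left fun _ => this) rfl rfl]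
        · -- measure
          simp only []
          omega
      · by_cases hZ : pvGet2 g nx.toNat ny.toNat none = none
        · -- empty: enqueue
          have hs : bfsStep n m t x y (queue, vis, g) d =
              (queue ++ [(nx, ny)], pvSet2 vis nx.toNat ny.toNat true, g) := by
            simp only [bfsStep, ← hnx, ← hny]
            rw [if_neg (by exact fun h => h hC), if_neg hV, if_neg hT, if_pos hZ]
          rw [hs]
          have hvalz : pvValF v n m (nx, ny) = none := by rw [← hcell]; exact hZ
          have hnqemp : pvEmp v n m (nx, ny) := ⟨hnqbox, hvalz⟩
          have hnqreach : pvReach (pvEmp v n m) (nx, ny) := pvReach.step hpreach hnbr hnqemp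
          refine ⟨⟨hdvisl', hdvisr', hInv.dgl, hInv.dgr, ?_, ?_, hv4', ?_, ?_⟩,
            hmono, fun r h => List.mem_append_left _ h, fun _ => hnqvis, ?_⟩
          · intro p hp
            rcases List.mem_append.1 hp with h | h
            · obtain ⟨hb, he, hr, hvz⟩ := hInv.q1 p h
              exact ⟨hb, he, hr, hmono p hvz⟩
            · rcases List.mem_singleton.1 h with rfl
              exact ⟨hnqbox, hnqemp, hnqreach, hnqvis⟩
          · exact hmono _ hInv.v0
          · -- v5
            intro p hpb hpv hpe hpq hpx q hqb hqn
            by_cases hpnq : p = (nx, ny)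
            · exact absurd (List.mem_append_right _ (by rw [hpnq]; exact List.mem_singleton.2 rfl)) hpq
            · rcases (hvisbox p hpb).1 hpv with rfl | h
              · exact absurd rfl hpnq
              · exact hmono q (hInv.v5 p hpb h hpe
                  (fun hin => hpq (List.mem_append_left _ hin)) hpx q hqb hqn)
          · -- gv
            intro p hpb
            rw [hInv.gv p hpb]
            by_cases hpe : p = (nx, ny)
            · subst hpe
              rw [hvalz]
              simp
            · have : pvVisRaw (pvSet2 vis nx.toNat ny.toNat true) p ↔ pvVisRaw vis p := by
                rw [hvisbox p hpb]
                constructor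
                · rintro (rfl | h)
                  · exact absurd rfl hpe
                  · exact h
                · exact Or.inr
              rw [if_congr (and_congr_left fun _ => this) rfl rfl]
          · -- measure
            simp only [List.length_append, List.length_cons, List.length_nil]
            omega
        · -- a different character: just mark visited
          have hs : bfsStep n m t x y (queue, vis, g) d =
              (queue, pvSet2 vis nx.toNat ny.toNat true, g) := by
            simp only [bfsStep, ← hnx, ← hny]
            rw [if_neg (by exact fun h => h hC), if_neg hV, if_neg hT, if_neg hZ]
          rw [hs]
          refine ⟨⟨hdvisl', hdvisr', hInv.dgl, hInv.dgr, ?_, ?_, hv4', ?_, ?_⟩,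
            hmono, fun r h => h, fun _ => hnqvis, ?_⟩
          · intro p hp
            obtain ⟨hb, he, hr, hvz⟩ := hInv.q1 p hp
            exact ⟨hb, he, hr, hmono p hvz⟩
          · exact hmono _ hInv.v0
          · -- v5
            intro p hpb hpv hpe hpq hpx q hqb hqn
            rcases (hvisbox p hpb).1 hpv with rfl | h
            · exact absurd (hcell.trans hpe.2) hZ
            · exact hmono q (hInv.v5 p hpb h hpe hpq hpx q hqb hqn)
          · -- gv
            intro p hpb
            rw [hInv.gv p hpb]
            by_cases hpe : p = (nx, ny)
            · subst hpe
              have hvr : pvValF v n m (nx, ny) ≠ some t := by rw [← hcell]; exact hT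
              rw [if_neg (by rintro ⟨-, h⟩; exact hvr h), if_neg (by rintro ⟨-, h⟩; exact hvr h)]
            · have : pvVisRaw (pvSet2 vis nx.toNat ny.toNat true) p ↔ pvVisRaw vis p := by
                rw [hvisbox p hpb]
                constructor
                · rintro (rfl | h)
                  · exact absurd rfl hpe
                  · exact h
                · exact Or.inr
              rw [if_congr (and_congr_left fun _ => this) rfl rfl]
          · -- measure
            simp only []
            omega
  · -- out of the frame: skip
    have hs : bfsStep n m t x y (queue, vis, g) d = (queue, vis, g) := by
      simp only [bfsStep, ← hnx, ← hny]
      rw [if_pos (by exact fun h => hC h)]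
    rw [hs]
    exact ⟨hInv, fun r h => h, fun r h => h, fun hbox => absurd hbox hC, le_refl _⟩


theorem bfs_fold_inv (n m : Nat) (v : Nat → Nat → Option Char) (t : Char) (x y : Int)
    (l : List Nat) (hl : ∀ d ∈ l, d < 4) :
    ∀ (queue : List (Int × Int)) (vis : List (List Bool)) (g : List (List (Option Char))),
    pvInBox n m (x, y) → pvEmp v n m (x, y) → pvReach (pvEmp v n m) (x, y) →
    BfsInv n m v t (fun p => p = (x, y)) queue vis g →
    BfsInv n m v t (fun p => p = (x, y)) (l.foldl (bfsStep n m t x y) (queue, vis, g)).1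
      (l.foldl (bfsStep n m t x y) (queue, vis, g)).2.1
      (l.foldl (bfsStep n m t x y) (queue, vis, g)).2.2 ∧
    (∀ r, pvVisRaw vis r → pvVisRaw (l.foldl (bfsStep n m t x y) (queue, vis, g)).2.1 r) ∧
    (∀ d ∈ l, pvInBox n m (x + pvDx.getD d 0, y + pvDy.getD d 0) →
      pvVisRaw (l.foldl (bfsStep n m t x y) (queue, vis, g)).2.1
        (x + pvDx.getD d 0, y + pvDy.getD d 0)) ∧
    pvFalseCount (l.foldl (bfsStep n m t x y) (queue, vis, g)).2.1 +
      (l.foldl (bfsStep n m t x y) (queue, vis, g)).1.length ≤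
      pvFalseCount vis + queue.length := by
  induction l with
  | nil =>
    intro queue vis g _ _ _ hInv
    exact ⟨hInv, fun r h => h, by simp, le_refl _⟩
  | cons d l ih =>
    intro queue vis g hpbox hpemp hpreach hInv
    obtain ⟨hInv1, hmono1, _, hcov1, hms1⟩ :=
      bfs_step_inv n m v t x y d (hl d List.mem_cons_self) queue vis g hpbox hpemp hpreach hInv
    have hstep : bfsStep n m t x y (queue, vis, g) d =
        ((bfsStep n m t x y (queue, vis, g) d).1,
         (bfsStep n m t x y (queue, vis, g) d).2.1,
         (bfsStep n m t x y (queue, vis, g) d).2.2) := rfl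
    obtain ⟨hInv2, hmono2, hcov2, hms2⟩ :=
      ih (fun e he => hl e (List.mem_cons_of_mem _ he))
        (bfsStep n m t x y (queue, vis, g) d).1
        (bfsStep n m t x y (queue, vis, g) d).2.1
        (bfsStep n m t x y (queue, vis, g) d).2.2 hpbox hpemp hpreach hInv1
    rw [List.foldl_cons, hstep]
    refine ⟨hInv2, fun r h => hmono2 r (hmono1 r h), ?_, by omega⟩
    intro e he hbox
    rcases List.mem_cons.1 he with rfl | he'
    · exact hmono2 _ (hcov1 hbox)
    · exact hcov2 e he' hbox

theorem pvValF_origin (v : Nat → Nat → Option Char) (n m : Nat) :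
    pvValF v n m (0, 0) = none := by
  unfold pvValF
  rw [if_neg]
  simp only [pvInterior]
  omega

theorem bfs_done (n m : Nat) (v : Nat → Nat → Option Char) (t : Char)
    (vis : List (List Bool)) (g : List (List (Option Char)))
    (hInv : BfsInv n m v t (fun _ => False) [] vis g) :
    ∀ p, pvInBox n m p →
      ((pvValF v n m p = some t ∧ (∃ r, pvReach (pvEmp v n m) r ∧ p ∈ pvNbrs r)) →
        pvGet2 g p.1.toNat p.2.toNat none = none) ∧
      (¬ (pvValF v n m p = some t ∧ (∃ r, pvReach (pvEmp v n m) r ∧ p ∈ pvNbrs r)) →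
        pvGet2 g p.1.toNat p.2.toNat none = pvValF v n m p) := by
  have hRV : ∀ r, pvReach (pvEmp v n m) r → pvVisRaw vis r := by
    intro r h
    induction h with
    | base => exact hInv.v0
    | step hp hq hE ih =>
      exact hInv.v5 _ (pvReach_emp hp).1 ih (pvReach_emp hp) (by simp) (by simp) _ hE.1 hq
  intro p hbox
  constructor
  · rintro ⟨hT, r, hr, hpr⟩
    have hv : pvVisRaw vis p :=
      hInv.v5 r (pvReach_emp hr).1 (hRV r hr) (pvReach_emp hr) (by simp) (by simp) p hbox hpr
    rw [hInv.gv p hbox, if_pos ⟨hv, hT⟩]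
  · intro hn
    rw [hInv.gv p hbox, if_neg]
    rintro ⟨hv, hT⟩
    apply hn
    refine ⟨hT, ?_⟩
    rcases hInv.v4 p hbox hv with rfl | h
    · rw [pvValF_origin] at hT; cases hT
    · exact h

theorem bfs_loop_correct (n m : Nat) (v : Nat → Nat → Option Char) (t : Char) :
    ∀ (fuel : Nat) (queue : List (Int × Int)) (vis : List (List Bool))
      (g : List (List (Option Char))),
    pvFalseCount vis + queue.length ≤ fuel →
    BfsInv n m v t (fun _ => False) queue vis g →
    ∀ p, pvInBox n m p →
      ((pvValF v n m p = some t ∧ (∃ r, pvReach (pvEmp v n m) r ∧ p ∈ pvNbrs r)) →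
        pvGet2 (bfsLoop n m t fuel queue vis g).2 p.1.toNat p.2.toNat none = none) ∧
      (¬ (pvValF v n m p = some t ∧ (∃ r, pvReach (pvEmp v n m) r ∧ p ∈ pvNbrs r)) →
        pvGet2 (bfsLoop n m t fuel queue vis g).2 p.1.toNat p.2.toNat none =
          pvValF v n m p) := by
  intro fuel
  induction fuel with
  | zero =>
    intro queue vis g hfuel hInv
    have hq : queue = [] := by
      cases queue with
      | nil => rfl
      | cons a l => simp only [List.length_cons] at hfuel; omega
    subst hq
    exact bfs_done n m v t vis g hInv
  | succ fuel ih =>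
    intro queue vis g hfuel hInv
    cases queue with
    | nil => exact bfs_done n m v t vis g hInv
    | cons p rest =>
      obtain ⟨x, y⟩ := p
      obtain ⟨hpbox, hpemp, hpreach, hpvis⟩ := hInv.q1 (x, y) List.mem_cons_self
      have hInvX : BfsInv n m v t (fun p => p = (x, y)) rest vis g := by
        refine ⟨hInv.dvisl, hInv.dvisr, hInv.dgl, hInv.dgr,
          fun p hp => hInv.q1 p (List.mem_cons_of_mem _ hp), hInv.v0, hInv.v4, ?_, hInv.gv⟩
        intro p hb hvz he hq hx q hqb hqn
        refine hInv.v5 p hb hvz he ?_ (by simp) q hqb hqn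
        intro hmem
        rcases List.mem_cons.1 hmem with h0 | h0
        · exact hx h0
        · exact hq h0
      obtain ⟨hInvF, hmonoF, hcovF, hmsF⟩ :=
        bfs_fold_inv n m v t x y (List.range 4) (fun d hd => List.mem_range.1 hd)
          rest vis g hpbox hpemp hpreach hInvX
      have hInv' : BfsInv n m v t (fun _ => False)
          ((List.range 4).foldl (bfsStep n m t x y) (rest, vis, g)).1
          ((List.range 4).foldl (bfsStep n m t x y) (rest, vis, g)).2.1
          ((List.range 4).foldl (bfsStep n m t x y) (rest, vis, g)).2.2 := by
        refine ⟨hInvF.dvisl, hInvF.dvisr, hInvF.dgl, hInvF.dgr, hInvF.q1, hInvF.v0, hInvF.v4,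
          ?_, hInvF.gv⟩
        intro p hb hvz he hq _ q hqb hqn
        by_cases hpx : p = (x, y)
        · subst hpx
          obtain ⟨d, hd4, hqd⟩ := nbrs_offset (x, y) q hqn
          rw [hqd]
          exact hcovF d (List.mem_range.2 hd4) (by rw [← hqd]; exact hqb)
        · exact hInvF.v5 p hb hvz he hq hpx q hqb hqn
      have hred : bfsLoop n m t (fuel + 1) ((x, y) :: rest) vis g =
          bfsLoop n m t fuel ((List.range 4).foldl (bfsStep n m t x y) (rest, vis, g)).1
            ((List.range 4).foldl (bfsStep n m t x y) (rest, vis, g)).2.1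
            ((List.range 4).foldl (bfsStep n m t x y) (rest, vis, g)).2.2 := rfl
      rw [hred]
      refine ih _ _ _ ?_ hInv'
      simp only [List.length_cons] at hfuel
      omega


theorem pvGet2_replicate {α : Type} (N M : Nat) (x d : α) (a b : Nat) :
    pvGet2 (List.replicate N (List.replicate M x)) a b d = if a < N ∧ b < M then x else d := by
  unfold pvGet2
  by_cases ha : a < N
  · have : (List.replicate N (List.replicate M x)).getD a [] = List.replicate M x := by
      simp [List.getD, List.getElem?_replicate, ha]
    rw [this]
    by_cases hb : b < M
    · simp [List.getD, List.getElem?_replicate, hb, ha]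
    · simp only [List.getD, List.getElem?_replicate]
      rw [if_neg hb, if_neg (by tauto)]
      rfl
  · have : (List.replicate N (List.replicate M x)).getD a [] = [] := by
      simp [List.getD, List.getElem?_replicate, ha]
    rw [this, if_neg (by tauto)]
    rfl

theorem replicate_rows {α : Type} (N M : Nat) (x : α) :
    ∀ row ∈ List.replicate N (List.replicate M x), row.length = M := by
  intro row h
  rw [List.eq_of_mem_replicate h]
  simp

theorem bfs_correct (t : Char) (storage : List (List (Option Char))) (n m : Nat)
    (hlen : storage.length = n) (hrows : ∀ row ∈ storage, m ≤ row.length) :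
    (bfs t storage n m).map List.length = storage.map List.length ∧
    ∀ i j, i < n → j < m →
      ((pvGet2 storage i j none = some t ∧
          (∃ r, pvReach (pvEmp (fun a b => pvGet2 storage a b none) n m) r ∧
            (((i : Int) + 1, (j : Int) + 1) ∈ pvNbrs r))) →
        pvGet2 (bfs t storage n m) i j none = none) ∧
      (¬ (pvGet2 storage i j none = some t ∧
          (∃ r, pvReach (pvEmp (fun a b => pvGet2 storage a b none) n m) r ∧
            (((i : Int) + 1, (j : Int) + 1) ∈ pvNbrs r))) →
        pvGet2 (bfs t storage n m) i j none = pvGet2 storage i j none) := by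
  set v : Nat → Nat → Option Char := fun a b => pvGet2 storage a b none with hvdef
  set vis0 : List (List Bool) :=
    pvSet2 (List.replicate (n + 2) (List.replicate (m + 2) false)) 0 0 true with hvis0
  set ns : List (List (Option Char)) := (List.range n).foldl (fun acc i =>
    (List.range m).foldl (fun acc j =>
      pvSet2 acc (i + 1) (j + 1) (pvGet2 storage i j none)) acc)
    (List.replicate (n + 2) (List.replicate (m + 2) none)) with hns
  set L := bfsLoop n m t (pvFalseCount vis0 + 2) [((0 : Int), (0 : Int))] vis0 ns with hLdef
  have hbfs : bfs t storage n m = (List.range n).foldl (fun acc i =>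
      (List.range m).foldl (fun acc j =>
        pvSet2 acc i j (pvGet2 L.2 (i + 1) (j + 1) none)) acc) storage := rfl
  -- the copy-in pass
  obtain ⟨hnslen, hnsget⟩ := grid_fold_spec (none : Option Char) n m 1 1 (n + 2) (m + 2)
    (fun acc i j => pvSet2 acc (i + 1) (j + 1) (pvGet2 storage i j none))
    (fun i j _ => pvGet2 storage i j none)
    (fun g i j _ _ => pvSet2_map_length g (i + 1) (j + 1) (pvGet2 storage i j none))
    (fun g i j hi hj hN hM i' j' => by
      exact pvGet2_pvSet2 g (i + 1) (j + 1) i' j' (pvGet2 storage i j none) none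
        (by omega)
        (by have := (rows_iff_getD g (fun l => m + 2 ≤ l)).1 hM (i + 1) (by omega); omega))
    (List.replicate (n + 2) (List.replicate (m + 2) none)) (by simp)
    (by intro row h; rw [replicate_rows _ _ _ row h])
  rw [← hns] at hnslen hnsget
  have hnsL : ns.length = n + 2 := by
    rw [map_length_len _ _ hnslen]; simp
  have hnsR : ∀ row ∈ ns, row.length = m + 2 := by
    refine (rows_iff_getD _ (fun l => l = m + 2)).2 ?_
    intro i hi
    rw [map_length_row _ _ hnslen i]
    have : i < n + 2 := by rw [hnsL] at hi; omega
    simp [List.getD, List.getElem?_replicate, this]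
  -- the initial visited matrix
  have hrep0 : ((List.replicate (n + 2) (List.replicate (m + 2) false)).getD 0 []).length
      = m + 2 := by
    simp [List.getD, List.getElem?_replicate]
  have hvisget : ∀ a b : Nat, pvGet2 vis0 a b false = if a = 0 ∧ b = 0 then true else false := by
    intro a b
    rw [hvis0, pvGet2_pvSet2 _ 0 0 a b true false (by simp) (by rw [hrep0]; omega)]
    split
    · rfl
    · rw [pvGet2_replicate]
      split <;> rfl
  have hvis0L : vis0.length = n + 2 := by rw [hvis0, pvSet2_length]; simp
  have hvis0R : ∀ row ∈ vis0, row.length = m + 2 := by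
    refine (rows_iff_getD _ (fun l => l = m + 2)).2 ?_
    intro i hi
    rw [hvis0, map_length_row _ _ (pvSet2_map_length _ 0 0 true) i]
    have : i < n + 2 := by rw [hvis0L] at hi; omega
    simp [List.getD, List.getElem?_replicate, this]
  have hvisp : ∀ p : Int × Int, pvInBox n m p → (pvVisRaw vis0 p ↔ p = (0, 0)) := by
    intro p hbox
    unfold pvVisRaw
    rw [hvisget]
    constructor
    · intro h
      split at h
      · rename_i hz
        rw [Prod.ext_iff]
        constructor <;> [skip; skip] <;> omega
      · cases h
    · rintro rfl
      simp
  have hvz : pvVisRaw vis0 (0, 0) := by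
    unfold pvVisRaw
    rw [hvisget]
    simp
  -- the initial invariant
  have hInv0 : BfsInv n m v t (fun _ => False) [((0 : Int), (0 : Int))] vis0 ns := by
    refine ⟨hvis0L, hvis0R, hnsL, hnsR, ?_, hvz, ?_, ?_, ?_⟩
    · intro p hp
      rcases List.mem_cons.1 hp with rfl | h
      · exact ⟨⟨by omega, by omega, by omega, by omega⟩, pvEmp_origin v n m, pvReach.base, hvz⟩
      · simp at h
    · intro p hbox hv
      exact Or.inl ((hvisp p hbox).1 hv)
    · intro p hbox hv hE hq _
      exact absurd (by rw [(hvisp p hbox).1 hv]; exact List.mem_cons_self) hq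
    · intro p hbox
      have hcond : ¬ (pvVisRaw vis0 p ∧ pvValF v n m p = some t) := by
        rintro ⟨h1, h2⟩
        rw [(hvisp p hbox).1 h1, pvValF_origin] at h2
        cases h2
      rw [if_neg hcond, hnsget]
      unfold pvValF
      by_cases hint : pvInterior n m p
      · rw [if_pos (by obtain ⟨h1, h2, h3, h4⟩ := hint; omega), if_pos hint]
      · rw [if_neg (by intro h; exact hint (by obtain ⟨h1, h2, h3, h4⟩ := hbox; omega)),
          if_neg hint, pvGet2_replicate]
        split <;> rfl
  have hloop := bfs_loop_correct n m v t (pvFalseCount vis0 + 2) [((0 : Int), (0 : Int))]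
    vis0 ns (by simp) hInv0
  -- the copy-back pass
  obtain ⟨hblen, hbget⟩ := grid_fold_spec (none : Option Char) n m 0 0 n m
    (fun acc i j => pvSet2 acc i j (pvGet2 L.2 (i + 1) (j + 1) none))
    (fun i j _ => pvGet2 L.2 (i + 1) (j + 1) none)
    (fun g i j _ _ => pvSet2_map_length g i j _)
    (fun g i j hi hj hN hM i' j' => by
      refine pvGet2_pvSet2 g i j i' j' _ none (by omega) ?_
      have := (rows_iff_getD g (fun l => m ≤ l)).1 hM i (by omega)
      omega)
    storage hlen hrows
  rw [← hbfs] at hblen hbget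
  refine ⟨hblen, ?_⟩
  intro i j hi hj
  have hget := hbget i j
  rw [if_pos (by omega)] at hget
  simp only [Nat.sub_zero] at hget
  have hp : pvInBox n m (((i : Int) + 1), ((j : Int) + 1)) := by
    constructor
    · omega
    · exact ⟨by omega, by omega, by omega⟩
  have hchar := hloop (((i : Int) + 1), ((j : Int) + 1)) hp
  have ht1 : ((i : Int) + 1).toNat = i + 1 := by omega
  have ht2 : ((j : Int) + 1).toNat = j + 1 := by omega
  rw [ht1, ht2] at hchar
  have hvalf : pvValF v n m (((i : Int) + 1), ((j : Int) + 1)) = pvGet2 storage i j none := by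
    unfold pvValF
    rw [if_pos (by exact ⟨by omega, by omega, by omega, by omega⟩)]
    rw [ht1, ht2]
    simp [hvdef]
  rw [hvalf] at hchar
  constructor
  · intro hcond
    rw [hget, hchar.1 hcond]
  · intro hcond
    rw [hget, hchar.2 hcond]


-- ---------- counting the nonzero cells ----------
theorem foldl_count_row {α : Type} (p : α → Prop) [DecidablePred p] (l : List α) (a : Int) :
    l.foldl (fun a x => if p x then a + 1 else a) a = a + (l.countP (fun x => decide (p x)) : Int) := by
  induction l generalizing a with
  | nil => simp
  | cons x xs ih =>
    simp only [List.foldl_cons, List.countP_cons, ih]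
    by_cases h : p x <;> simp [h] <;> ring

theorem countP_eq_range {α : Type} (row : List α) (p : α → Bool) (d : α) :
    row.countP p = (List.range row.length).countP (fun c => p (row.getD c d)) := by
  induction row with
  | nil => simp
  | cons x xs ih =>
    rw [List.countP_cons, List.length_cons, List.range_succ_eq_map, List.countP_cons,
      List.countP_map]
    simp only [List.getD_cons_zero, Function.comp_def, List.getD_cons_succ]
    rw [ih]

theorem double_count_A (n m : Nat) (P : Nat → Nat → Prop) [∀ r c, Decidable (P r c)] (a : Int) :
    (List.range n).foldl (fun a r =>
        (List.range m).foldl (fun a c => if P r c then a + 1 else a) a) a =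
      a + ∑ r ∈ Finset.range n, ((List.range m).countP (fun c => decide (P r c)) : Int) := by
  induction n with
  | zero => simp
  | succ n ih =>
    rw [List.range_succ, List.foldl_append, List.foldl_cons, List.foldl_nil, ih,
      foldl_count_row (P n) _ _, Finset.sum_range_succ]
    ring

theorem double_count_B {α : Type} (Q : α → Prop) [DecidablePred Q] :
    ∀ (g : List (List α)) (a : Int),
    g.foldl (fun a row => row.foldl (fun a x => if Q x then a + 1 else a) a) a =
      a + ∑ r ∈ Finset.range g.length, ((g.getD r []).countP (fun x => decide (Q x)) : Int) := by
  intro g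
  induction g with
  | nil => simp
  | cons row rows ih =>
    intro a
    rw [List.foldl_cons, foldl_count_row Q row a, ih, List.length_cons,
      Finset.sum_range_succ']
    simp only [List.getD_cons_succ, List.getD_cons_zero]
    ring

-- ---------- reachability congruence ----------
theorem pvReach_congr {E E' : Int × Int → Prop} (h : ∀ p, E p ↔ E' p) {q : Int × Int}
    (hr : pvReach E q) : pvReach E' q := by
  induction hr with
  | base => exact pvReach.base
  | step hp hq hE ih => exact pvReach.step ih hq ((h _).1 hE)

theorem pvEmp_congr (v v' : Nat → Nat → Option Char) (n m : Nat)
    (h : ∀ i j, i < n → j < m → v i j = v' i j) (p : Int × Int) :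
    pvEmp v n m p ↔ pvEmp v' n m p := by
  unfold pvEmp
  rw [pvValF_congr h p]


-- ---------- one crane request ----------
theorem crane_step (n m : Nat) (t : Char) (g0 : List (List (Option Char))) (M : Nat)
    (h1 : g0.length = n) (h2 : ∀ row ∈ g0, M ≤ row.length) (hM : m ≤ M) :
    (((List.range n).foldl (fun st r => (List.range m).foldl (fun st c =>
        if pvGet2 st r c none = some t then pvSet2 st r c none else st) st) g0).map
        List.length = g0.map List.length) ∧
    ∀ i j, pvGet2 ((List.range n).foldl (fun st r => (List.range m).foldl (fun st c =>
        if pvGet2 st r c none = some t then pvSet2 st r c none else st) st) g0) i j none =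
      if i < n ∧ j < m then
        (if pvGet2 g0 i j none = some t then none else pvGet2 g0 i j none)
      else pvGet2 g0 i j none := by
  obtain ⟨hl, hg⟩ := grid_fold_spec (none : Option Char) n m 0 0 n M
    (fun g r c => if pvGet2 g r c none = some t then pvSet2 g r c none else g)
    (fun _ _ x => if x = some t then none else x)
    (fun g i j _ _ => by
      beta_reduce
      split
      · exact pvSet2_map_length g i j none
      · rfl)
    (fun g i j hi hj hN hMr i' j' => by
      beta_reduce
      have hia : i < g.length := by omega
      have hja : j < (g.getD i []).length := by
        have := (rows_iff_getD g (fun l => M ≤ l)).1 hMr i hia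
        omega
      simp only [Nat.add_zero]
      by_cases hc : pvGet2 g i j none = some t
      · rw [if_pos hc, pvGet2_pvSet2 g i j i' j' none none hia hja]
        by_cases he : i' = i ∧ j' = j
        · rw [if_pos he, if_pos he, if_pos hc]
        · rw [if_neg he, if_neg he]
      · rw [if_neg hc]
        by_cases he : i' = i ∧ j' = j
        · rcases he with ⟨rfl, rfl⟩
          rw [if_pos ⟨rfl, rfl⟩, if_neg hc]
        · rw [if_neg he])
    g0 h1 h2
  refine ⟨hl, ?_⟩
  intro i j
  rw [hg i j]
  by_cases hij : i < n ∧ j < m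
  · rw [if_pos (by omega), if_pos hij]
  · rw [if_neg (by omega), if_neg hij]

-- ---------- one forklift request: A's bfs versus B's flood-and-sweep ----------
theorem forklift_step (n m : Nat) (t : Char) (stA gB : List (List (Option Char)))
    (h1 : stA.length = n) (h2 : ∀ row ∈ stA, m ≤ row.length)
    (h3 : gB.length = n) (h4 : ∀ row ∈ gB, row.length = m)
    (h5 : ∀ i j, i < n → j < m → pvGet2 stA i j none = pvGet2 gB i j none) :
    ((bfs t stA n m).map List.length = stA.map List.length) ∧
    (((List.range n).foldl (fun g i => (List.range m).foldl (fun g j =>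
        if pvGet2 g i j none = some t ∧
           ((pvFloodLoop gB n m (5 * ((n + 2) * (m + 2)) + 1)
              [((0 : Int), (0 : Int))] PySem.Set.empty).contains ((i : Int) + 2, (j : Int) + 1) ||
            (pvFloodLoop gB n m (5 * ((n + 2) * (m + 2)) + 1)
              [((0 : Int), (0 : Int))] PySem.Set.empty).contains ((i : Int), (j : Int) + 1) ||
            (pvFloodLoop gB n m (5 * ((n + 2) * (m + 2)) + 1)
              [((0 : Int), (0 : Int))] PySem.Set.empty).contains ((i : Int) + 1, (j : Int) + 2) ||
            (pvFloodLoop gB n m (5 * ((n + 2) * (m + 2)) + 1)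
              [((0 : Int), (0 : Int))] PySem.Set.empty).contains ((i : Int) + 1, (j : Int))) = true
        then pvSet2 g i j none else g) g) gB).map List.length = gB.map List.length) ∧
    ∀ i j, i < n → j < m →
      pvGet2 (bfs t stA n m) i j none =
        pvGet2 ((List.range n).foldl (fun g i => (List.range m).foldl (fun g j =>
          if pvGet2 g i j none = some t ∧
             ((pvFloodLoop gB n m (5 * ((n + 2) * (m + 2)) + 1)
                [((0 : Int), (0 : Int))] PySem.Set.empty).contains ((i : Int) + 2, (j : Int) + 1) ||
              (pvFloodLoop gB n m (5 * ((n + 2) * (m + 2)) + 1)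
                [((0 : Int), (0 : Int))] PySem.Set.empty).contains ((i : Int), (j : Int) + 1) ||
              (pvFloodLoop gB n m (5 * ((n + 2) * (m + 2)) + 1)
                [((0 : Int), (0 : Int))] PySem.Set.empty).contains ((i : Int) + 1, (j : Int) + 2) ||
              (pvFloodLoop gB n m (5 * ((n + 2) * (m + 2)) + 1)
                [((0 : Int), (0 : Int))] PySem.Set.empty).contains ((i : Int) + 1, (j : Int))) = true
          then pvSet2 g i j none else g) g) gB) i j none := by
  set vA : Nat → Nat → Option Char := fun a b => pvGet2 stA a b none with hvA
  set vB : Nat → Nat → Option Char := fun a b => pvGet2 gB a b none with hvB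
  set reach := pvFloodLoop gB n m (5 * ((n + 2) * (m + 2)) + 1)
    [((0 : Int), (0 : Int))] PySem.Set.empty with hreach
  have hcont : ∀ q, reach.contains q = true ↔ pvReach (pvEmp vB n m) q :=
    flood_correct gB n m vB (fun i j _ _ => rfl) h3
      (fun row hrow => by rw [h4 row hrow])
  have hEiff : ∀ p, pvEmp vA n m p ↔ pvEmp vB n m p :=
    pvEmp_congr vA vB n m (fun i j hi hj => h5 i j hi hj)
  obtain ⟨hAlen, hAchar⟩ := bfs_correct t stA n m h1 h2
  obtain ⟨hBlen, hBget⟩ := grid_fold_spec (none : Option Char) n m 0 0 n m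
    (fun g i j => if pvGet2 g i j none = some t ∧
        (reach.contains ((i : Int) + 2, (j : Int) + 1) ||
         reach.contains ((i : Int), (j : Int) + 1) ||
         reach.contains ((i : Int) + 1, (j : Int) + 2) ||
         reach.contains ((i : Int) + 1, (j : Int))) = true
      then pvSet2 g i j none else g)
    (fun i j x => if x = some t ∧
        (reach.contains ((i : Int) + 2, (j : Int) + 1) ||
         reach.contains ((i : Int), (j : Int) + 1) ||
         reach.contains ((i : Int) + 1, (j : Int) + 2) ||
         reach.contains ((i : Int) + 1, (j : Int))) = true
      then none else x)
    (fun g i j _ _ => by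
      beta_reduce
      split
      · exact pvSet2_map_length g i j none
      · rfl)
    (fun g i j hi hj hN hMr i' j' => by
      beta_reduce
      have hia : i < g.length := by omega
      have hja : j < (g.getD i []).length := by
        have := (rows_iff_getD g (fun l => m ≤ l)).1 hMr i hia
        omega
      simp only [Nat.add_zero]
      by_cases hc : pvGet2 g i j none = some t ∧
          (reach.contains ((i : Int) + 2, (j : Int) + 1) ||
           reach.contains ((i : Int), (j : Int) + 1) ||
           reach.contains ((i : Int) + 1, (j : Int) + 2) ||
           reach.contains ((i : Int) + 1, (j : Int))) = true
      · rw [if_pos hc, pvGet2_pvSet2 g i j i' j' none none hia hja]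
        by_cases he : i' = i ∧ j' = j
        · rw [if_pos he, if_pos he, if_pos hc]
        · rw [if_neg he, if_neg he]
      · rw [if_neg hc]
        by_cases he : i' = i ∧ j' = j
        · rcases he with ⟨rfl, rfl⟩
          rw [if_pos ⟨rfl, rfl⟩, if_neg hc]
        · rw [if_neg he])
    gB h3 (fun row hrow => by rw [h4 row hrow])
  refine ⟨hAlen, hBlen, ?_⟩
  intro i j hi hj
  obtain ⟨hA1, hA2⟩ := hAchar i j hi hj
  have hBval := hBget i j
  rw [if_pos (by omega)] at hBval
  simp only [Nat.sub_zero] at hBval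
  -- translate the four membership tests into adjacency to the reachable set
  have hor : (reach.contains ((i : Int) + 2, (j : Int) + 1) ||
      reach.contains ((i : Int), (j : Int) + 1) ||
      reach.contains ((i : Int) + 1, (j : Int) + 2) ||
      reach.contains ((i : Int) + 1, (j : Int))) = true ↔
      (∃ r, pvReach (pvEmp vA n m) r ∧
        (((i : Int) + 1, (j : Int) + 1) ∈ pvNbrs r)) := by
    constructor
    · intro h
      rcases Bool.or_eq_true_iff.1 h with h' | h4'
      · rcases Bool.or_eq_true_iff.1 h' with h'' | h3'
        · rcases Bool.or_eq_true_iff.1 h'' with h1' | h2'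
          · refine ⟨_, pvReach_congr (fun p => (hEiff p).symm) ((hcont _).1 h1'), ?_⟩
            rw [mem_pvNbrs]
            dsimp only
            omega
          · refine ⟨_, pvReach_congr (fun p => (hEiff p).symm) ((hcont _).1 h2'), ?_⟩
            rw [mem_pvNbrs]
            dsimp only
            omega
        · refine ⟨_, pvReach_congr (fun p => (hEiff p).symm) ((hcont _).1 h3'), ?_⟩
          rw [mem_pvNbrs]
          dsimp only
          omega
      · refine ⟨_, pvReach_congr (fun p => (hEiff p).symm) ((hcont _).1 h4'), ?_⟩
        rw [mem_pvNbrs]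
        dsimp only
        omega
    · rintro ⟨r, hr, hmem⟩
      have hcr : reach.contains r = true :=
        (hcont r).2 (pvReach_congr hEiff hr)
      rw [mem_pvNbrs] at hmem
      dsimp only at hmem
      rcases hmem with ⟨ha, hb⟩ | ⟨ha, hb⟩ | ⟨ha, hb⟩ | ⟨ha, hb⟩
      · have : r = ((i : Int), (j : Int) + 1) := Prod.ext_iff.2 ⟨by omega, by omega⟩
        rw [this] at hcr
        have hmm := (PySem.Set.contains_iff _ _).1 hcr
        simp only [Bool.or_eq_true, PySem.Set.contains_iff]
        tauto
      · have : r = ((i : Int) + 2, (j : Int) + 1) := Prod.ext_iff.2 ⟨by omega, by omega⟩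
        rw [this] at hcr
        have hmm := (PySem.Set.contains_iff _ _).1 hcr
        simp only [Bool.or_eq_true, PySem.Set.contains_iff]
        tauto
      · have : r = ((i : Int) + 1, (j : Int)) := Prod.ext_iff.2 ⟨by omega, by omega⟩
        rw [this] at hcr
        have hmm := (PySem.Set.contains_iff _ _).1 hcr
        simp only [Bool.or_eq_true, PySem.Set.contains_iff]
        tauto
      · have : r = ((i : Int) + 1, (j : Int) + 2) := Prod.ext_iff.2 ⟨by omega, by omega⟩
        rw [this] at hcr
        have hmm := (PySem.Set.contains_iff _ _).1 hcr
        simp only [Bool.or_eq_true, PySem.Set.contains_iff]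
        tauto
  by_cases hCB : pvGet2 gB i j none = some t ∧
      (reach.contains ((i : Int) + 2, (j : Int) + 1) ||
       reach.contains ((i : Int), (j : Int) + 1) ||
       reach.contains ((i : Int) + 1, (j : Int) + 2) ||
       reach.contains ((i : Int) + 1, (j : Int))) = true
  · rw [hBval, if_pos hCB]
    exact hA1 ⟨by rw [h5 i j hi hj]; exact hCB.1, hor.1 hCB.2⟩
  · rw [hBval, if_neg hCB, ← h5 i j hi hj]
    refine hA2 ?_
    rintro ⟨hval, hex⟩
    exact hCB ⟨by rw [← h5 i j hi hj]; exact hval, hor.2 hex⟩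


theorem foldl_rel {α β γ : Type} (R : α → β → Prop) (G : γ → Prop)
    (fa : α → γ → α) (fb : β → γ → β)
    (h : ∀ a b x, G x → R a b → R (fa a x) (fb b x)) :
    ∀ (l : List γ) a b, (∀ x ∈ l, G x) → R a b → R (l.foldl fa a) (l.foldl fb b) := by
  intro l
  induction l with
  | nil => intro a b _ hr; exact hr
  | cons x xs ih =>
    intro a b hg hr
    exact ih _ _ (fun y hy => hg y (List.mem_cons_of_mem _ hy))
      (h a b x (hg x List.mem_cons_self) hr)


theorem rows_ge_trans (g g' : List (List (Option Char))) (M : Nat)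
    (h : g'.map List.length = g.map List.length) (hr : ∀ row ∈ g, M ≤ row.length) :
    ∀ row ∈ g', M ≤ row.length := by
  refine (rows_iff_getD _ (fun l => M ≤ l)).2 ?_
  intro i hi
  rw [map_length_row g g' h i]
  exact (rows_iff_getD g (fun l => M ≤ l)).1 hr i (by rw [← map_length_len g g' h]; exact hi)

theorem rows_eq_trans (g g' : List (List (Option Char))) (M : Nat)
    (h : g'.map List.length = g.map List.length) (hr : ∀ row ∈ g, row.length = M) :
    ∀ row ∈ g', row.length = M := by
  refine (rows_iff_getD _ (fun l => l = M)).2 ?_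
  intro i hi
  rw [map_length_row g g' h i]
  exact (rows_iff_getD g (fun l => l = M)).1 hr i (by rw [← map_length_len g g' h]; exact hi)

-- ===== VERDICT (by name: the statement is the Claim_ definition above) =====
theorem solution_spec : Claim_equal_solution := by
  unfold Claim_equal_solution
  intro storage requests hdom hpre
  unfold Spec_solution
  obtain ⟨hne, hrowlen, -⟩ := hpre
  obtain ⟨s0, rest, rfl⟩ : ∃ s0 rest, storage = s0 :: rest := by
    cases storage with
    | nil => exact absurd rfl hne
    | cons a l => exact ⟨a, l, rfl⟩
  simp only [solution, solution_alt, List.map_cons, List.getD_cons_zero, List.headD_cons,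
    List.length_map, List.length_cons]
  set NN := rest.length + 1 with hNN
  set MM := s0.toList.length with hMM
  have hrow0 : ∀ s ∈ s0 :: rest, MM ≤ s.toList.length := fun s hs => hrowlen s hs
  -- the relation maintained between A's grid and B's cropped grid
  set R : List (List (Option Char)) → List (List (Option Char)) → Prop :=
    fun a b => a.length = NN ∧ (∀ row ∈ a, MM ≤ row.length) ∧ b.length = NN ∧
      (∀ row ∈ b, row.length = MM) ∧
      (∀ i j, i < NN → j < MM → pvGet2 a i j none = pvGet2 b i j none) with hR
  have hstep : ∀ a b (req : String), True → R a b →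
      R ((fun st req =>
            if req.toList.length = 1 then bfs (req.toList.headD ' ') st NN MM
            else
              List.foldl (fun st r => List.foldl (fun st c =>
                  if pvGet2 st r c none = some (req.toList.headD ' ') then pvSet2 st r c none
                  else st) st (List.range MM)) st (List.range NN)) a req)
        ((fun grid req =>
            if req.toList.length = 1 then
              List.foldl (fun g i => List.foldl (fun g j =>
                  if pvGet2 g i j none = some (req.toList.headD ' ') ∧
                     ((pvFloodLoop grid NN MM (5 * ((NN + 2) * (MM + 2)) + 1) [(0, 0)]
                         PySem.Set.empty).contains (↑i + 2, ↑j + 1) ||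
                      (pvFloodLoop grid NN MM (5 * ((NN + 2) * (MM + 2)) + 1) [(0, 0)]
                         PySem.Set.empty).contains (↑i, ↑j + 1) ||
                      (pvFloodLoop grid NN MM (5 * ((NN + 2) * (MM + 2)) + 1) [(0, 0)]
                         PySem.Set.empty).contains (↑i + 1, ↑j + 2) ||
                      (pvFloodLoop grid NN MM (5 * ((NN + 2) * (MM + 2)) + 1) [(0, 0)]
                         PySem.Set.empty).contains (↑i + 1, ↑j)) = true
                  then pvSet2 g i j none else g) g (List.range MM)) grid (List.range NN)
            else
              List.foldl (fun g i => List.foldl (fun g j =>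
                  if pvGet2 g i j none = some (req.toList.headD ' ') then pvSet2 g i j none
                  else g) g (List.range MM)) grid (List.range NN)) b req) := by
    intro a b req _ hab
    obtain ⟨ha1, ha2, hb1, hb2, hpw⟩ := hab
    by_cases hL : req.toList.length = 1
    · simp only [if_pos hL]
      obtain ⟨hAlen, hBlen, hptw⟩ :=
        forklift_step NN MM (req.toList.headD ' ') a b ha1 ha2 hb1 hb2 hpw
      exact ⟨by rw [map_length_len a _ hAlen]; exact ha1,
        rows_ge_trans a _ MM hAlen ha2,
        by rw [map_length_len b _ hBlen]; exact hb1,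
        rows_eq_trans b _ MM hBlen hb2, hptw⟩
    · simp only [if_neg hL]
      obtain ⟨hAlen, hAget⟩ :=
        crane_step NN MM (req.toList.headD ' ') a MM ha1 ha2 (le_refl MM)
      obtain ⟨hBlen, hBget⟩ :=
        crane_step NN MM (req.toList.headD ' ') b MM hb1
          (fun row hrow => le_of_eq (hb2 row hrow).symm) (le_refl MM)
      refine ⟨by rw [map_length_len a _ hAlen]; exact ha1,
        rows_ge_trans a _ MM hAlen ha2,
        by rw [map_length_len b _ hBlen]; exact hb1,
        rows_eq_trans b _ MM hBlen hb2, ?_⟩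
      intro i j hi hj
      rw [hAget i j, hBget i j]
      rw [if_pos (show i < NN ∧ j < MM from ⟨hi, hj⟩),
        if_pos (show i < NN ∧ j < MM from ⟨hi, hj⟩)]
      rw [hpw i j hi hj]
  -- the initial grids are related
  have htake : ∀ (s : String), MM ≤ s.toList.length → ∀ j, j < MM →
      (List.map some s.toList).getD j none =
        (List.map some (List.take MM s.toList)).getD j none := by
    intro s hs j hj
    rw [List.getD, List.getD, List.getElem?_map, List.getElem?_map,
      List.getElem?_eq_getElem (show j < s.toList.length by omega),
      List.getElem?_eq_getElem (show j < (List.take MM s.toList).length by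
        rw [List.length_take]; omega)]
    simp [List.getElem_take]
  have hRinit : R (List.map some s0.toList :: List.map (fun s => List.map some s.toList) rest)
      (List.map some (List.take MM s0.toList) ::
        List.map (fun s => List.map some (List.take MM s.toList)) rest) := by
    refine ⟨by simp [hNN], ?_, by simp [hNN], ?_, ?_⟩
    · intro row hrow
      rcases List.mem_cons.1 hrow with rfl | hrow
      · simp [hMM]
      · obtain ⟨s, hs, rfl⟩ := List.mem_map.1 hrow
        rw [List.length_map]
        exact hrow0 s (List.mem_cons_of_mem _ hs)
    · intro row hrow
      rcases List.mem_cons.1 hrow with rfl | hrow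
      · rw [List.length_map, List.length_take]
        omega
      · obtain ⟨s, hs, rfl⟩ := List.mem_map.1 hrow
        rw [List.length_map, List.length_take]
        have := hrow0 s (List.mem_cons_of_mem _ hs)
        omega
    · intro i j hi hj
      unfold pvGet2
      cases i with
      | zero =>
        simp only [List.getD_cons_zero]
        exact htake s0 (hrow0 s0 List.mem_cons_self) j hj
      | succ k =>
        have hk : k < rest.length := by omega
        simp only [List.getD_cons_succ]
        have := htake rest[k] (hrow0 rest[k] (List.mem_cons_of_mem _ (List.getElem_mem hk))) j hj
        simp only [List.getD, List.getElem?_map, List.getElem?_eq_getElem hk,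
          Option.map_some, Option.getD_some] at this ⊢
        exact this
  have hRfin := foldl_rel R (fun _ : String => True) _ _ hstep requests _ _
    (fun _ _ => trivial) hRinit
  obtain ⟨hf1, hf2, hf3, hf4, hfpw⟩ := hRfin
  rw [double_count_A NN MM _ 0, double_count_B _ _ 0, hf3]
  congr 1
  refine Finset.sum_congr rfl ?_
  intro r hr
  have hrNN : r < NN := Finset.mem_range.1 hr
  have hrowlenB := (rows_iff_getD _ (fun l => l = MM)).1 hf4 r (by rw [hf3]; exact hrNN)
  rw [countP_eq_range _ _ none, hrowlenB]
  congr 1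
  refine List.countP_congr ?_
  intro c hc
  have hcMM : c < MM := List.mem_range.1 hc
  rw [hfpw r c hrNN hcMM]
  rfl
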